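-- pv_equiv track=rewrite | github.com/S-Christensen/cartographersStudy | spring/midgameEvaluation.py | shoreside_progress
-- ===== SOURCE A (Python) =====
-- def dfs(grid, row, col, visited, terrain_type):
--     stack = [(row, col)]
--     cluster = []
--
--     while stack:
--         r, c = stack.pop()
--         if (r, c) not in visited and grid[r][c] == terrain_type:
--             visited.add((r, c))
--             cluster.append((r, c))
--             for dr, dc in [(1, 0), (-1, 0), (0, 1), (0, -1)]:
--                 nr, nc = r + dr, c + dc
--                 if 0 <= nr < len(grid) and 0 <= nc < len(grid[0]):
--                     stack.append((nr, nc))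
--     return cluster
--
-- def shoreside_progress(grid):
--     visited = set()
--     farm_clusters = []
--     water_clusters = []
--
--     for r in range(len(grid)):
--         for c in range(len(grid[0])):
--             if (r, c) not in visited:
--                 if grid[r][c] == "Farm":
--                     cluster = dfs(grid, r, c, visited, "Farm")
--                     farm_clusters.append(cluster)
--                 elif grid[r][c] == "Water":
--                     cluster = dfs(grid, r, c, visited, "Water")
--                     water_clusters.append(cluster)
--
--     def is_isolated(cluster, target):
--         for r, c in cluster:
--             for dr, dc in [(1,0), (-1,0), (0,1), (0,-1)]:
--                 nr, nc = r + dr, c + dc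
--                 if not (0 <= nr < len(grid) and 0 <= nc < len(grid[0])):
--                     return False
--                 if grid[nr][nc] == target:
--                     return False
--         return True
--
--     count = 0
--     for cluster in farm_clusters:
--         if is_isolated(cluster, "Water"):
--             count += 1
--     for cluster in water_clusters:
--         if is_isolated(cluster, "Farm"):
--             count += 1
--
--     return count * 3
-- ===== SOURCE B (Python) =====
-- def shoreside_progress(grid):
--     h = len(grid)
--     if h == 0:
--         return 0
--     w = len(grid[0])
--     parent = {}
--     for r in range(h):
--         for c in range(w):
--             parent[(r, c)] = (r, c)
--
--     def find(x):
--         while parent[x] != x: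
--             x = parent[x]
--         return x
--
--     def union(a, b):
--         ra, rb = find(a), find(b)
--         if ra != rb:
--             if rb < ra:
--                 ra, rb = rb, ra
--             parent[rb] = ra
--
--     for r in range(h):
--         for c in range(w):
--             t = grid[r][c]
--             if t == "Farm" or t == "Water":
--                 if c + 1 < w and grid[r][c + 1] == t:
--                     union((r, c), (r, c + 1))
--                 if r + 1 < h and grid[r + 1][c] == t:
--                     union((r, c), (r + 1, c))
--
--     bad = set()
--     for r in range(h):
--         for c in range(w):
--             t = grid[r][c]
--             if t == "Farm" or t == "Water":
--                 opposite = "Water" if t == "Farm" else "Farm"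
--                 if (r == 0 or r == h - 1 or c == 0 or c == w - 1
--                         or grid[r - 1][c] == opposite or grid[r + 1][c] == opposite
--                         or grid[r][c - 1] == opposite or grid[r][c + 1] == opposite):
--                     bad.add(find((r, c)))
--
--     count = 0
--     for r in range(h):
--         for c in range(w):
--             t = grid[r][c]
--             if (t == "Farm" or t == "Water") and find((r, c)) == (r, c) and (r, c) not in bad:
--                 count += 1
--     return count * 3
-- ===== Notes on version B (the rewrite author's own statement) =====
-- stated objective: alternative
-- what changed: Replaced the stack-based DFS flood fill with shared visited set by a union-find over cell coordinates (linking each Farm/Water cell to its same-type right/down neighbour, root = lexicographically least cell), then counted roots of components containing no border or opposite-adjacent cell.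
import Mathlib
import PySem

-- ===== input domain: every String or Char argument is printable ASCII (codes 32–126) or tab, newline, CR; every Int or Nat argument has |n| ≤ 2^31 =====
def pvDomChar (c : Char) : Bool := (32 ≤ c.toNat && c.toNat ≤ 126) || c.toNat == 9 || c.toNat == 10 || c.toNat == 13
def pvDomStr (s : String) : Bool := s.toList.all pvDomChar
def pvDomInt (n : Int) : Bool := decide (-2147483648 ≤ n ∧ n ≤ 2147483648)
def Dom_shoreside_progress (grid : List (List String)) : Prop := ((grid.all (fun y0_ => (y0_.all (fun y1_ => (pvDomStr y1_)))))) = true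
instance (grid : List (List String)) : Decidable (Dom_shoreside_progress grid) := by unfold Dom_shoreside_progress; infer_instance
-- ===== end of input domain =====

-- B replaces A's DFS flood fill (explicit stack + shared visited set) by a union-find over
-- cell coordinates; same return value, no speed claim (objective: alternative).


-- ===== PORT A =====
-- grid[r][c]; total via pyGetD — exact on Pre_ (every access A makes is in range there)
def pvAt (grid : List (List String)) (r c : Int) : String :=
  PySem.List.pyGetD (PySem.List.pyGetD grid r []) c ""

def pvDirs : List (Int × Int) := [(1, 0), (-1, 0), (0, 1), (0, -1)]

-- the 'while stack' loop of dfs; the stack is head-first (Python appends/pops at the right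
-- end; consing each pushed neighbour and popping the head visits cells in the same order).
-- fuel makes the loop total; pvDfs passes enough for it never to run out (proved below).
def pvDfsLoop (grid : List (List String)) (tt : String) :
    Nat → List (Int × Int) → PySem.Set (Int × Int) → List (Int × Int) →
    List (Int × Int) × PySem.Set (Int × Int)
  | 0, _, visited, cluster => (cluster, visited)
  | fuel + 1, stack, visited, cluster =>
    match stack with
    | [] => (cluster, visited)
    | (r, c) :: rest =>
      if (r, c) ∉ visited ∧ pvAt grid r c = tt then
        pvDfsLoop grid tt fuel
          (pvDirs.foldl (fun st d =>
            if 0 ≤ r + d.1 ∧ r + d.1 < (grid.length : Int) ∧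
               0 ≤ c + d.2 ∧ c + d.2 < ((PySem.List.pyGetD grid 0 []).length : Int) then
              (r + d.1, c + d.2) :: st
            else st) rest)
          (PySem.Set.add visited (r, c))
          (cluster ++ [(r, c)])
      else
        pvDfsLoop grid tt fuel rest visited cluster

def pvDfs (grid : List (List String)) (row col : Int)
    (visited : PySem.Set (Int × Int)) (tt : String) :
    List (Int × Int) × PySem.Set (Int × Int) :=
  pvDfsLoop grid tt (4 * grid.length * (PySem.List.pyGetD grid 0 []).length + 2)
    [(row, col)] visited []

def pvIsolated (grid : List (List String)) (cluster : List (Int × Int)) (target : String) : Bool :=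
  cluster.all fun p => pvDirs.all fun d =>
    decide (0 ≤ p.1 + d.1 ∧ p.1 + d.1 < (grid.length : Int) ∧
            0 ≤ p.2 + d.2 ∧ p.2 + d.2 < ((PySem.List.pyGetD grid 0 []).length : Int)) &&
    !(pvAt grid (p.1 + d.1) (p.2 + d.2) == target)

def shoreside_progress (grid : List (List String)) : Int :=
  let st := (PySem.List.pyRange 0 (grid.length : Int) 1).foldl
    (fun st r =>
      (PySem.List.pyRange 0 ((PySem.List.pyGetD grid 0 []).length : Int) 1).foldl
        (fun st c =>
          if (r, c) ∉ st.1 then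
            if pvAt grid r c = "Farm" then
              let p := pvDfs grid r c st.1 "Farm"
              (p.2, st.2.1 ++ [p.1], st.2.2)
            else if pvAt grid r c = "Water" then
              let p := pvDfs grid r c st.1 "Water"
              (p.2, st.2.1, st.2.2 ++ [p.1])
            else st
          else st) st)
    (([] : PySem.Set (Int × Int)), ([] : List (List (Int × Int))), ([] : List (List (Int × Int))))
  let count := st.2.1.foldl (fun n cl => if pvIsolated grid cl "Water" then n + 1 else n) (0 : Int)
  let count := st.2.2.foldl (fun n cl => if pvIsolated grid cl "Farm" then n + 1 else n) count
  count * 3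

-- ===== PORT B =====
-- Python tuple comparison (r, c) < (r', c') on int pairs
def pvPairLtB (p q : Int × Int) : Bool := p.1 < q.1 || (p.1 == q.1 && p.2 < q.2)

-- 'while parent[x] != x: x = parent[x]'; fuel makes it total, h*w is always enough (proved below)
def pvFind (parent : PySem.Dict (Int × Int) (Int × Int)) : Nat → (Int × Int) → (Int × Int)
  | 0, x => x
  | fuel + 1, x =>
    let p := parent.getD x x
    if p = x then x else pvFind parent fuel p

def pvUnion (parent : PySem.Dict (Int × Int) (Int × Int)) (fuel : Nat) (a b : Int × Int) :
    PySem.Dict (Int × Int) (Int × Int) :=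
  let ra := pvFind parent fuel a
  let rb := pvFind parent fuel b
  if ra = rb then parent
  else if pvPairLtB rb ra then parent.insert ra rb
  else parent.insert rb ra

def shoreside_progress_alt (grid : List (List String)) : Int :=
  let h := (grid.length : Int)
  if h = 0 then 0 else
  let w := ((PySem.List.pyGetD grid 0 []).length : Int)
  let n := grid.length * (PySem.List.pyGetD grid 0 []).length
  let parent0 : PySem.Dict (Int × Int) (Int × Int) :=
    (PySem.List.pyRange 0 h 1).foldl (fun d r =>
      (PySem.List.pyRange 0 w 1).foldl (fun d c => d.insert (r, c) (r, c)) d) PySem.Dict.empty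
  let parent := (PySem.List.pyRange 0 h 1).foldl (fun par r =>
      (PySem.List.pyRange 0 w 1).foldl (fun par c =>
        let t := pvAt grid r c
        if t = "Farm" ∨ t = "Water" then
          let par := if c + 1 < w ∧ pvAt grid r (c + 1) = t then pvUnion par n (r, c) (r, c + 1) else par
          if r + 1 < h ∧ pvAt grid (r + 1) c = t then pvUnion par n (r, c) (r + 1, c) else par
        else par) par) parent0
  let bad : PySem.Set (Int × Int) := (PySem.List.pyRange 0 h 1).foldl (fun bd r =>
      (PySem.List.pyRange 0 w 1).foldl (fun bd c =>
        let t := pvAt grid r c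
        if t = "Farm" ∨ t = "Water" then
          if r = 0 ∨ r = h - 1 ∨ c = 0 ∨ c = w - 1 ∨
             pvAt grid (r - 1) c = (if t = "Farm" then "Water" else "Farm") ∨
             pvAt grid (r + 1) c = (if t = "Farm" then "Water" else "Farm") ∨
             pvAt grid r (c - 1) = (if t = "Farm" then "Water" else "Farm") ∨
             pvAt grid r (c + 1) = (if t = "Farm" then "Water" else "Farm") then
            PySem.Set.add bd (pvFind parent n (r, c))
          else bd
        else bd) bd) PySem.Set.empty
  let count := (PySem.List.pyRange 0 h 1).foldl (fun ct r =>
      (PySem.List.pyRange 0 w 1).foldl (fun ct c =>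
        let t := pvAt grid r c
        if (t = "Farm" ∨ t = "Water") ∧ pvFind parent n (r, c) = (r, c) ∧ (r, c) ∉ bad then
          ct + 1
        else ct) ct) (0 : Int)
  count * 3

-- ===== PRECONDITION & SPEC =====
-- Pre_ excludes exactly the grids on which A raises IndexError: some row shorter than row 0
def Pre_shoreside_progress (grid : List (List String)) : Prop :=
  ∀ row ∈ grid, (grid.headD []).length ≤ row.length
instance (grid : List (List String)) : Decidable (Pre_shoreside_progress grid) := by
  unfold Pre_shoreside_progress; infer_instance

def pvWitness_shoreside_progress : List (List String) := [["Farm"]]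

def Spec_shoreside_progress (grid : List (List String)) (out : Int) : Prop := out = shoreside_progress_alt grid
instance (grid : List (List String)) (out : Int) : Decidable (Spec_shoreside_progress grid out) := by unfold Spec_shoreside_progress; infer_instance

-- ===== CLAIM (what is proved, stated in full; the proofs are below) =====
def Claim_equal_shoreside_progress : Prop := ∀ (grid : List (List String)), Dom_shoreside_progress grid → Pre_shoreside_progress grid → Spec_shoreside_progress grid (shoreside_progress grid)

-- ===== LEMMAS AND PROOFS =====

-- ---------- basic grid notions ----------
def pvH (g : List (List String)) : Int := (g.length : Int)
def pvW (g : List (List String)) : Int := ((PySem.List.pyGetD g 0 []).length : Int)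
def pvTyp (g : List (List String)) (p : Int × Int) : String := pvAt g p.1 p.2
def pvInb (g : List (List String)) (p : Int × Int) : Prop :=
  0 ≤ p.1 ∧ p.1 < pvH g ∧ 0 ≤ p.2 ∧ p.2 < pvW g
def pvFW (g : List (List String)) (p : Int × Int) : Prop :=
  pvTyp g p = "Farm" ∨ pvTyp g p = "Water"
def pvAdj (p q : Int × Int) : Prop := ∃ d ∈ pvDirs, q = (p.1 + d.1, p.2 + d.2)
def pvStep (g : List (List String)) (t : String) (p q : Int × Int) : Prop :=
  pvInb g p ∧ pvInb g q ∧ pvTyp g p = t ∧ pvTyp g q = t ∧ pvAdj p q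
def pvConn (g : List (List String)) (t : String) : (Int × Int) → (Int × Int) → Prop :=
  Relation.ReflTransGen (pvStep g t)
def cLe (p q : Int × Int) : Prop := p.1 < q.1 ∨ (p.1 = q.1 ∧ p.2 ≤ q.2)
def cLt (p q : Int × Int) : Prop := p.1 < q.1 ∨ (p.1 = q.1 ∧ p.2 < q.2)
def pvGood (g : List (List String)) (t : String) (p : Int × Int) : Prop :=
  ∀ d ∈ pvDirs, pvInb g (p.1 + d.1, p.2 + d.2) ∧ pvAt g (p.1 + d.1) (p.2 + d.2) ≠ t
def pvOpp (t : String) : String := if t = "Farm" then "Water" else "Farm"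
-- the canonical per-cell predicate both programs count: x is the row-major least cell of
-- its same-type component and that component touches no border and no opposite cell
def pvCounted (g : List (List String)) (p : Int × Int) : Prop :=
  pvFW g p ∧ pvInb g p ∧ (∀ q, pvConn g (pvTyp g p) p q → cLe p q) ∧
    (∀ q, pvConn g (pvTyp g p) p q → pvGood g (pvOpp (pvTyp g p)) q)
def pvCells (g : List (List String)) : List (Int × Int) :=
  (PySem.List.pyRange 0 (pvH g) 1).flatMap
    (fun r => (PySem.List.pyRange 0 (pvW g) 1).map (fun c => (r, c)))

def cLeB (p q : Int × Int) : Bool := p.1 < q.1 || (p.1 == q.1 && p.2 ≤ q.2)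

-- ---------- order facts ----------
theorem cLeB_iff {p q : Int × Int} : cLeB p q = true ↔ cLe p q := by
  unfold cLeB cLe; simp
theorem cLe_refl (p : Int × Int) : cLe p p := by unfold cLe; omega
theorem cLe_trans {p q r : Int × Int} (h1 : cLe p q) (h2 : cLe q r) : cLe p r := by
  unfold cLe at *; omega
theorem cLe_antisymm {p q : Int × Int} (h1 : cLe p q) (h2 : cLe q p) : p = q := by
  unfold cLe at *; obtain ⟨a, b⟩ := p; obtain ⟨c, d⟩ := q; simp_all; omega
theorem cLt_of_cLt_of_cLe {p q r : Int × Int} (h1 : cLt p q) (h2 : cLe q r) : cLt p r := by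
  unfold cLt cLe at *; omega
theorem cLe_of_cLt {p q : Int × Int} (h : cLt p q) : cLe p q := by unfold cLt cLe at *; omega
theorem cLt_irrefl (p : Int × Int) : ¬ cLt p p := by unfold cLt; omega

-- ---------- cells facts ----------
theorem mem_pvCells {g : List (List String)} {p : Int × Int} :
    p ∈ pvCells g ↔ pvInb g p := by
  unfold pvCells pvInb pvH pvW
  simp only [List.mem_flatMap, List.mem_map, PySem.List.mem_pyRange_one]
  constructor
  · rintro ⟨r, ⟨hr1, hr2⟩, c, ⟨hc1, hc2⟩, rfl⟩; exact ⟨hr1, hr2, hc1, hc2⟩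
  · rintro ⟨h1, h2, h3, h4⟩; exact ⟨p.1, ⟨h1, h2⟩, p.2, ⟨h3, h4⟩, rfl⟩
theorem pvCells_sorted (g : List (List String)) : (pvCells g).Pairwise cLt := by
  unfold pvCells pvH pvW
  rw [PySem.List.pyRange_zero_natCast, PySem.List.pyRange_zero_natCast]
  rw [List.pairwise_flatMap]
  constructor
  · intro r _
    rw [List.pairwise_map, List.pairwise_map]
    refine List.pairwise_lt_range.imp ?_
    intro a b h
    unfold cLt
    right
    exact ⟨rfl, Int.ofNat_lt.mpr h⟩
  · rw [List.pairwise_map]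
    refine List.pairwise_lt_range.imp ?_
    intro a b hab x hx y hy
    simp only [List.mem_map, List.mem_range] at hx hy
    obtain ⟨cx, _, rfl⟩ := hx
    obtain ⟨cy, _, rfl⟩ := hy
    unfold cLt
    left
    exact Int.ofNat_lt.mpr hab

theorem pvCells_nodup (g : List (List String)) : (pvCells g).Nodup := by
  refine (pvCells_sorted g).imp ?_
  intro a b h he
  exact cLt_irrefl a (he ▸ h)

theorem length_pvCells (g : List (List String)) :
    (pvCells g).length = g.length * (PySem.List.pyGetD g 0 []).length := by
  unfold pvCells pvH pvW
  rw [PySem.List.pyRange_zero_natCast, PySem.List.pyRange_zero_natCast]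
  rw [List.length_flatMap]
  simp [Function.comp_def, List.map_const', List.sum_replicate]

-- ---------- connectivity facts ----------
theorem pvAdj_symm {p q : Int × Int} (h : pvAdj p q) : pvAdj q p := by
  unfold pvAdj pvDirs at *
  obtain ⟨d, hd, rfl⟩ := h
  simp only [List.mem_cons, List.not_mem_nil, or_false] at hd
  rcases hd with rfl | rfl | rfl | rfl
  · exact ⟨(-1, 0), by simp, by simp⟩
  · exact ⟨(1, 0), by simp, by simp⟩
  · exact ⟨(0, -1), by simp, by simp⟩
  · exact ⟨(0, 1), by simp, by simp⟩

theorem pvStep_symm {g : List (List String)} {t : String} : Symmetric (pvStep g t) := by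
  rintro p q ⟨h1, h2, h3, h4, h5⟩
  exact ⟨h2, h1, h4, h3, pvAdj_symm h5⟩
theorem pvConn_symm {g : List (List String)} {t : String} {p q : Int × Int}
    (h : pvConn g t p q) : pvConn g t q p :=
  Relation.ReflTransGen.symmetric pvStep_symm h
theorem pvConn_trans {g : List (List String)} {t : String} {p q r : Int × Int}
    (h1 : pvConn g t p q) (h2 : pvConn g t q r) : pvConn g t p r :=
  Relation.ReflTransGen.trans h1 h2
theorem pvConn_cases {g : List (List String)} {t : String} {p q : Int × Int}
    (h : pvConn g t p q) :
    p = q ∨ (pvInb g p ∧ pvInb g q ∧ pvTyp g p = t ∧ pvTyp g q = t) := by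
  induction h with
  | refl => exact Or.inl rfl
  | tail _ hst ih =>
    right
    obtain ⟨h1, h2, h3, h4, _⟩ := hst
    rcases ih with rfl | ⟨i1, _, i3, _⟩
    · exact ⟨h1, h2, h3, h4⟩
    · exact ⟨i1, h2, i3, h4⟩

-- ---------- generic counting helpers ----------
theorem countP_disjoint {α : Type} (l : List α) (p q : α → Bool)
    (h : ∀ x ∈ l, ¬(p x = true ∧ q x = true)) :
    l.countP p + l.countP q = l.countP (fun x => p x || q x) := by
  induction l with
  | nil => simp
  | cons a l ih =>
    have ha := h a (List.mem_cons_self ..)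
    have ih' := ih (fun x hx => h x (List.mem_cons_of_mem _ hx))
    simp only [List.countP_cons]
    cases hp : p a <;> cases hq : q a <;> simp [hp, hq] at ha ⊢ <;> omega
theorem countP_remove_one {α : Type} [DecidableEq α] {l : List α} (hnd : l.Nodup)
    {x : α} (hx : x ∈ l) (p : α → Bool) (hpx : p x = true) :
    l.countP (fun y => p y && !(decide (y = x))) + 1 = l.countP p := by
  induction l with
  | nil => simp at hx
  | cons a l ih =>
    rcases List.mem_cons.1 hx with rfl | hx'
    · have hnx : x ∉ l := (List.nodup_cons.1 hnd).1
      have hc : l.countP (fun y => p y && !(decide (y = x))) = l.countP p := by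
        apply List.countP_congr
        intro y hy
        have : y ≠ x := fun he => hnx (he ▸ hy)
        simp [this]
      simp [List.countP_cons, hpx, hc]
    · have ih' := ih (List.nodup_cons.1 hnd).2 hx'
      have hax : a ≠ x := fun he => (List.nodup_cons.1 hnd).1 (he ▸ hx')
      simp only [List.countP_cons, hax, beq_iff_eq, if_neg]
      simp [hax]
      omega

-- ---------- DFS (port A) ----------
def pvStepA (g : List (List String)) (t : String) (V : List (Int × Int))
    (p q : Int × Int) : Prop := pvStep g t p q ∧ p ∉ V ∧ q ∉ V
def pvReachA (g : List (List String)) (t : String) (V : List (Int × Int))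
    (u x : Int × Int) : Prop :=
  pvInb g u ∧ pvTyp g u = t ∧ u ∉ V ∧ Relation.ReflTransGen (pvStepA g t V) u x

theorem pvStepA_mono {g : List (List String)} {t : String} {V : List (Int × Int)}
    {s p q : Int × Int} (h : pvStepA g t (V ++ [s]) p q) : pvStepA g t V p q := by
  obtain ⟨h1, h2, h3⟩ := h
  simp only [List.mem_append] at h2 h3
  exact ⟨h1, fun hm => h2 (Or.inl hm), fun hm => h3 (Or.inl hm)⟩

theorem pvReachA_mono {g : List (List String)} {t : String} {V : List (Int × Int)}
    {s u x : Int × Int} (h : pvReachA g t (V ++ [s]) u x) : pvReachA g t V u x := by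
  obtain ⟨h1, h2, h3, h4⟩ := h
  simp only [List.mem_append] at h3
  exact ⟨h1, h2, fun hm => h3 (Or.inl hm),
    Relation.ReflTransGen.mono (fun p q hs => pvStepA_mono hs) h4⟩

-- cutting one forbidden cell s out of an avoiding path
theorem pvRtgA_remove {g : List (List String)} {t : String} {V : List (Int × Int)}
    {s u x : Int × Int} (h : Relation.ReflTransGen (pvStepA g t V) u x) (hx : x ≠ s) :
    (u ≠ s ∧ Relation.ReflTransGen (pvStepA g t (V ++ [s])) u x) ∨
    (∃ n, pvStep g t s n ∧ n ∉ V ∧ n ≠ s ∧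
      Relation.ReflTransGen (pvStepA g t (V ++ [s])) n x) := by
  induction h using Relation.ReflTransGen.head_induction_on with
  | refl => exact Or.inl ⟨hx, Relation.ReflTransGen.refl⟩
  | head hst _ ih =>
    rename_i u u₁ _
    obtain ⟨hstep, huV, hu₁V⟩ := hst
    rcases ih with ⟨hne₁, hpath⟩ | ⟨n, hn⟩
    · by_cases hus : u = s
      · subst hus
        exact Or.inr ⟨u₁, hstep, hu₁V, hne₁, hpath⟩
      · left
        refine ⟨hus, Relation.ReflTransGen.head ⟨hstep, ?_, ?_⟩ hpath⟩
        · simp only [List.mem_append, List.mem_singleton]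
          rintro (h | h)
          · exact huV h
          · exact hus h
        · simp only [List.mem_append, List.mem_singleton]
          rintro (h | h)
          · exact hu₁V h
          · exact hne₁ h
    · exact Or.inr ⟨n, hn⟩

theorem foldl_push_mem {α β : Type} [DecidableEq β] (P : α → Prop) [DecidablePred P]
    (nbr : α → β) (ds : List α) :
    ∀ (rest : List β) (y : β),
      y ∈ ds.foldl (fun st d => if P d then nbr d :: st else st) rest ↔
        (∃ d ∈ ds, P d ∧ y = nbr d) ∨ y ∈ rest := by
  induction ds with
  | nil => simp
  | cons d ds ih =>
    intro rest y
    simp only [List.foldl_cons]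
    by_cases hP : P d
    · rw [if_pos hP, ih]
      constructor
      · rintro (⟨d', hd', h1, h2⟩ | hr)
        · exact Or.inl ⟨d', List.mem_cons_of_mem _ hd', h1, h2⟩
        · rcases List.mem_cons.1 hr with rfl | hr'
          · exact Or.inl ⟨d, List.mem_cons_self .., hP, rfl⟩
          · exact Or.inr hr'
      · rintro (⟨d', hd', h1, h2⟩ | hr)
        · rcases List.mem_cons.1 hd' with rfl | hd''
          · subst h2
            exact Or.inr (List.mem_cons_self ..)
          · exact Or.inl ⟨d', hd'', h1, h2⟩
        · exact Or.inr (List.mem_cons_of_mem _ hr)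
    · rw [if_neg hP, ih]
      constructor
      · rintro (⟨d', hd', h1, h2⟩ | hr)
        · exact Or.inl ⟨d', List.mem_cons_of_mem _ hd', h1, h2⟩
        · exact Or.inr hr
      · rintro (⟨d', hd', h1, h2⟩ | hr)
        · rcases List.mem_cons.1 hd' with rfl | hd''
          · exact absurd h1 hP
          · exact Or.inl ⟨d', hd'', h1, h2⟩
        · exact Or.inr hr

theorem foldl_push_length {α β : Type} (P : α → Prop) [DecidablePred P]
    (nbr : α → β) (ds : List α) :
    ∀ (rest : List β),
      (ds.foldl (fun st d => if P d then nbr d :: st else st) rest).length ≤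
        rest.length + ds.length := by
  induction ds with
  | nil => simp
  | cons d ds ih =>
    intro rest
    simp only [List.foldl_cons, List.length_cons]
    by_cases hP : P d
    · rw [if_pos hP]
      calc _ ≤ (nbr d :: rest).length + ds.length := ih _
        _ = rest.length + (ds.length + 1) := by simp [List.length_cons]; omega
    · rw [if_neg hP]
      calc _ ≤ rest.length + ds.length := ih _
        _ ≤ rest.length + (ds.length + 1) := by omega

theorem mem_push {g : List (List String)} {r c : Int} {rest : List (Int × Int)}
    {y : Int × Int} :
    y ∈ pvDirs.foldl (fun st d =>
        if 0 ≤ r + d.1 ∧ r + d.1 < (g.length : Int) ∧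
           0 ≤ c + d.2 ∧ c + d.2 < ((PySem.List.pyGetD g 0 []).length : Int) then
          (r + d.1, c + d.2) :: st
        else st) rest ↔
      (pvAdj (r, c) y ∧ pvInb g y) ∨ y ∈ rest := by
  rw [foldl_push_mem]
  constructor
  · rintro (⟨d, hd, hP, rfl⟩ | hrest)
    · exact Or.inl ⟨⟨d, hd, rfl⟩, hP⟩
    · exact Or.inr hrest
  · rintro (⟨⟨d, hd, rfl⟩, hInb⟩ | hrest)
    · exact Or.inl ⟨d, hd, hInb, rfl⟩
    · exact Or.inr hrest
theorem length_push {g : List (List String)} {r c : Int} {rest : List (Int × Int)} :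
    (pvDirs.foldl (fun st d =>
        if 0 ≤ r + d.1 ∧ r + d.1 < (g.length : Int) ∧
           0 ≤ c + d.2 ∧ c + d.2 < ((PySem.List.pyGetD g 0 []).length : Int) then
          (r + d.1, c + d.2) :: st
        else st) rest).length ≤ rest.length + 4 := by
  exact foldl_push_length _ _ pvDirs rest

theorem pvDfsLoop_spec (g : List (List String)) (t : String) :
    ∀ (fuel : Nat) (stack V cl : List (Int × Int)),
    (∀ p ∈ stack, pvInb g p) → V.Nodup →
    ((pvCells g).countP (fun y => !(decide (y ∈ V))) * 4 + stack.length ≤ fuel) →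
    ∃ L, pvDfsLoop g t fuel stack V cl = (cl ++ L, V ++ L) ∧ (V ++ L).Nodup ∧
      ∀ x, x ∈ L ↔ ∃ u ∈ stack, pvReachA g t V u x := by
  intro fuel
  induction fuel with
  | zero =>
    intro stack V cl hstk hnd hfuel
    have hlen : stack.length = 0 := by omega
    have hstk0 : stack = [] := List.length_eq_zero_iff.mp hlen
    subst hstk0
    exact ⟨[], by simp [pvDfsLoop], by simpa using hnd, by simp⟩
  | succ fuel ih =>
    intro stack V cl hstk hnd hfuel
    rcases stack with _ | ⟨⟨r, c⟩, rest⟩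
    · exact ⟨[], by simp [pvDfsLoop], by simpa using hnd, by simp⟩
    by_cases hcond : (r, c) ∉ V ∧ pvAt g r c = t
    case neg =>
      -- skipped cell: either already visited or of another terrain
      have hstep : pvDfsLoop g t (fuel + 1) ((r, c) :: rest) V cl =
          pvDfsLoop g t fuel rest V cl := by
        simp only [pvDfsLoop]
        rw [if_neg hcond]
      obtain ⟨L, hres, hndL, hmem⟩ :=
        ih rest V cl (fun p hp => hstk p (List.mem_cons_of_mem _ hp)) hnd
          (by simp only [List.length_cons] at hfuel; omega)
      refine ⟨L, hstep ▸ hres, hndL, fun x => (hmem x).trans ?_⟩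
      constructor
      · rintro ⟨u, hu, hr⟩
        exact ⟨u, List.mem_cons_of_mem _ hu, hr⟩
      · rintro ⟨u, hu, hr⟩
        rcases List.mem_cons.1 hu with rfl | hu'
        · obtain ⟨_, h2, h3, _⟩ := hr
          exact absurd ⟨h3, h2⟩ hcond
        · exact ⟨u, hu', hr⟩
    case pos =>
      obtain ⟨hxV, hxT⟩ := hcond
      have hxInb : pvInb g (r, c) := hstk _ (List.mem_cons_self ..)
      have hxC : (r, c) ∈ pvCells g := mem_pvCells.2 hxInb
      have hadd : PySem.Set.add V (r, c) = V ++ [(r, c)] := by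
        simp [PySem.Set.add, List.contains_iff_mem, hxV]
      have hstep : pvDfsLoop g t (fuel + 1) ((r, c) :: rest) V cl =
          pvDfsLoop g t fuel
            (pvDirs.foldl (fun st d =>
              if 0 ≤ r + d.1 ∧ r + d.1 < (g.length : Int) ∧
                 0 ≤ c + d.2 ∧ c + d.2 < ((PySem.List.pyGetD g 0 []).length : Int) then
                (r + d.1, c + d.2) :: st
              else st) rest)
            (V ++ [(r, c)]) (cl ++ [(r, c)]) := by
        simp only [pvDfsLoop]
        rw [if_pos ⟨hxV, hxT⟩, hadd]
      -- the unvisited count drops by one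
      have hcnt : (pvCells g).countP (fun y => !(decide (y ∈ V ++ [(r, c)]))) + 1 =
          (pvCells g).countP (fun y => !(decide (y ∈ V))) := by
        have he : (pvCells g).countP (fun y => !(decide (y ∈ V ++ [(r, c)]))) =
            (pvCells g).countP (fun y => (!(decide (y ∈ V))) && !(decide (y = (r, c)))) := by
          apply List.countP_congr
          intro y _
          by_cases h1 : y ∈ V <;> by_cases h2 : y = (r, c) <;>
            simp [h1, h2, List.mem_append]
        rw [he]
        exact countP_remove_one (pvCells_nodup g) hxC
          (fun y => !(decide (y ∈ V))) (by simp [hxV])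
      obtain ⟨L', hres, hndL, hmem⟩ := ih
        (pvDirs.foldl (fun st d =>
          if 0 ≤ r + d.1 ∧ r + d.1 < (g.length : Int) ∧
             0 ≤ c + d.2 ∧ c + d.2 < ((PySem.List.pyGetD g 0 []).length : Int) then
            (r + d.1, c + d.2) :: st
          else st) rest)
        (V ++ [(r, c)]) (cl ++ [(r, c)])
        (fun p hp => by
          rcases mem_push.1 hp with ⟨_, hInb⟩ | hp'
          · exact hInb
          · exact hstk p (List.mem_cons_of_mem _ hp'))
        (by
          rw [List.nodup_append]
          refine ⟨hnd, List.nodup_singleton _, ?_⟩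
          intro a ha b hb
          rw [List.mem_singleton] at hb
          subst hb
          exact fun he => hxV (he ▸ ha))
        (by
          have hlp : (pvDirs.foldl (fun st d =>
              if 0 ≤ r + d.1 ∧ r + d.1 < (g.length : Int) ∧
                 0 ≤ c + d.2 ∧ c + d.2 < ((PySem.List.pyGetD g 0 []).length : Int) then
                (r + d.1, c + d.2) :: st
              else st) rest).length ≤ rest.length + 4 := length_push
          simp only [List.length_cons] at hfuel
          omega)
      refine ⟨(r, c) :: L', ?_, ?_, ?_⟩
      · rw [hstep, hres]
        simp
      · simpa using hndL
      · intro x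
        constructor
        · intro hx
          rcases List.mem_cons.1 hx with rfl | hx'
          · exact ⟨(r, c), List.mem_cons_self .., hxInb, hxT, hxV,
              Relation.ReflTransGen.refl⟩
          · obtain ⟨u, hu, hInbu, hut, huV', hpath⟩ := (hmem x).1 hx'
            rcases mem_push.1 hu with ⟨hAdj, _⟩ | hu'
            · -- u is a pushed neighbour of (r, c): extend the path through (r, c)
              have huV : u ∉ V := fun hm => huV' (List.mem_append_left _ hm)
              refine ⟨(r, c), List.mem_cons_self .., hxInb, hxT, hxV,
                Relation.ReflTransGen.head ⟨⟨hxInb, hInbu, hxT, hut, hAdj⟩, hxV, huV⟩ ?_⟩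
              exact Relation.ReflTransGen.mono (fun p q hs => pvStepA_mono hs) hpath
            · exact ⟨u, List.mem_cons_of_mem _ hu',
                pvReachA_mono ⟨hInbu, hut, huV', hpath⟩⟩
        · rintro ⟨u, hu, hInbu, hut, huV, hpath⟩
          by_cases hxx : x = (r, c)
          · exact hxx ▸ List.mem_cons_self ..
          refine List.mem_cons_of_mem _ ((hmem x).2 ?_)
          rcases pvRtgA_remove hpath hxx with ⟨hune, hpath'⟩ | ⟨n, hstepn, hnV, hne, hpath'⟩
          · have hu' : u ∈ rest := by
              rcases List.mem_cons.1 hu with rfl | h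
              · exact absurd rfl hune
              · exact h
            refine ⟨u, mem_push.2 (Or.inr hu'), hInbu, hut, ?_, hpath'⟩
            simp only [List.mem_append, List.mem_singleton]
            rintro (h | h)
            · exact huV h
            · exact hune h
          · obtain ⟨_, hInbn, _, hnt, hAdjn⟩ := hstepn
            refine ⟨n, mem_push.2 (Or.inl ⟨hAdjn, hInbn⟩), hInbn, hnt, ?_, hpath'⟩
            simp only [List.mem_append, List.mem_singleton]
            rintro (h | h)
            · exact hnV h
            · exact hne h

-- V is a union of full components; the dfs of an unvisited seed returns exactly its component
def pvClosed (g : List (List String)) (V : List (Int × Int)) : Prop :=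
  ∀ x ∈ V, pvFW g x ∧ pvInb g x ∧ ∀ y, pvConn g (pvTyp g x) x y → y ∈ V

theorem conn_notin_of_closed {g : List (List String)} {V : List (Int × Int)}
    (hcl : pvClosed g V) {t : String} {p x : Int × Int} (hpV : p ∉ V)
    (hconn : pvConn g t p x) : x ∉ V := by
  intro hxV
  obtain ⟨_, _, hcomp⟩ := hcl x hxV
  rcases pvConn_cases hconn with rfl | ⟨_, _, _, hxt⟩
  · exact hpV hxV
  · have h2 : pvConn g (pvTyp g x) x p := by
      rw [hxt]
      exact pvConn_symm hconn
    exact hpV (hcomp p h2)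

theorem pvReachA_iff_conn {g : List (List String)} {t : String} {V : List (Int × Int)}
    (hcl : pvClosed g V) {p : Int × Int} (hp : pvInb g p) (ht : pvTyp g p = t)
    (hpv : p ∉ V) (x : Int × Int) : pvReachA g t V p x ↔ pvConn g t p x := by
  constructor
  · rintro ⟨_, _, _, hpath⟩
    exact Relation.ReflTransGen.mono (fun a b hs => hs.1) hpath
  · intro hconn
    refine ⟨hp, ht, hpv, ?_⟩
    induction hconn with
    | refl => exact Relation.ReflTransGen.refl
    | tail hxy hstep ih =>
      exact Relation.ReflTransGen.tail ih
        ⟨hstep, conn_notin_of_closed hcl hpv hxy,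
          conn_notin_of_closed hcl hpv (hxy.tail hstep)⟩

theorem pvDfs_spec (g : List (List String)) (t : String) (p : Int × Int)
    (V : List (Int × Int)) (hInb : pvInb g p) (ht : pvTyp g p = t) (hpv : p ∉ V)
    (hnd : V.Nodup) (hcl : pvClosed g V) :
    ∃ L, pvDfs g p.1 p.2 V t = (L, V ++ L) ∧ (V ++ L).Nodup ∧
      ∀ x, x ∈ L ↔ pvConn g t p x := by
  obtain ⟨L, hres, hnd', hmem⟩ := pvDfsLoop_spec g t
    (4 * g.length * (PySem.List.pyGetD g 0 []).length + 2) [p] V []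
    (by
      intro q hq
      rw [List.mem_singleton] at hq
      subst hq
      exact hInb)
    hnd
    (by
      have h1 : (pvCells g).countP (fun y => !(decide (y ∈ V))) ≤
          g.length * (PySem.List.pyGetD g 0 []).length := by
        calc (pvCells g).countP (fun y => !(decide (y ∈ V)))
            ≤ (pvCells g).length := List.countP_le_length
          _ = _ := length_pvCells g
      simp only [List.length_cons, List.length_nil]
      have hmul : 4 * g.length * (PySem.List.pyGetD g 0 []).length =
          4 * (g.length * (PySem.List.pyGetD g 0 []).length) := Nat.mul_assoc 4 _ _
      omega)
  refine ⟨L, ?_, hnd', fun x => (hmem x).trans ?_⟩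
  · unfold pvDfs
    simpa using hres
  · constructor
    · rintro ⟨u, hu, hr⟩
      rw [List.mem_singleton] at hu
      subst hu
      exact (pvReachA_iff_conn hcl hInb ht hpv x).1 hr
    · intro hc
      exact ⟨p, List.mem_singleton.2 rfl, (pvReachA_iff_conn hcl hInb ht hpv x).2 hc⟩

-- ---------- A-side characterisation ----------
theorem pvIsolated_iff {g : List (List String)} {cl : List (Int × Int)} {t : String} :
    pvIsolated g cl t = true ↔ ∀ p ∈ cl, pvGood g t p := by
  unfold pvIsolated pvGood pvInb pvH pvW
  simp [List.all_eq_true]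

-- the body of A's outer double loop, as a single fold over the cell list
def pvAStep (g : List (List String))
    (st : PySem.Set (Int × Int) × List (List (Int × Int)) × List (List (Int × Int)))
    (x : Int × Int) :
    PySem.Set (Int × Int) × List (List (Int × Int)) × List (List (Int × Int)) :=
  if x ∉ st.1 then
    if pvAt g x.1 x.2 = "Farm" then
      ((pvDfs g x.1 x.2 st.1 "Farm").2, st.2.1 ++ [(pvDfs g x.1 x.2 st.1 "Farm").1], st.2.2)
    else if pvAt g x.1 x.2 = "Water" then
      ((pvDfs g x.1 x.2 st.1 "Water").2, st.2.1, st.2.2 ++ [(pvDfs g x.1 x.2 st.1 "Water").1])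
    else st
  else st

theorem foldl_cells (g : List (List String))
    (st0 : PySem.Set (Int × Int) × List (List (Int × Int)) × List (List (Int × Int))) :
    (pvCells g).foldl (pvAStep g) st0 =
      (PySem.List.pyRange 0 (g.length : Int) 1).foldl
        (fun st r => (PySem.List.pyRange 0 ((PySem.List.pyGetD g 0 []).length : Int) 1).foldl
          (fun st c => pvAStep g st (r, c)) st) st0 := by
  unfold pvCells pvH pvW
  rw [List.foldl_flatMap]
  simp only [List.foldl_map]

theorem shoreside_eq_foldl (g : List (List String)) :
    shoreside_progress g =
      (((pvCells g).foldl (pvAStep g) ([], [], [])).2.2.foldl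
          (fun n cl => if pvIsolated g cl "Farm" then n + 1 else n)
          (((pvCells g).foldl (pvAStep g) ([], [], [])).2.1.foldl
            (fun n cl => if pvIsolated g cl "Water" then n + 1 else n) (0 : Int))) * 3 := by
  unfold shoreside_progress
  rw [foldl_cells]
  rfl

theorem closed_of_char {g : List (List String)} {P V : List (Int × Int)}
    (hchar : ∀ x, x ∈ V ↔ (pvFW g x ∧ pvInb g x ∧ ∃ y ∈ P, pvConn g (pvTyp g x) x y)) :
    pvClosed g V := by
  intro x hx
  obtain ⟨hFW, hInb, z, hz, hcz⟩ := (hchar x).1 hx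
  refine ⟨hFW, hInb, fun y hy => ?_⟩
  rcases pvConn_cases hy with rfl | ⟨_, hInby, _, hyt⟩
  · exact hx
  · have hFWy : pvFW g y := by
      unfold pvFW
      rw [hyt]
      exact hFW
    refine (hchar y).2 ⟨hFWy, hInby, z, hz, ?_⟩
    have h1 : pvConn g (pvTyp g y) y x := by
      rw [hyt]
      exact pvConn_symm hy
    have h2 : pvConn g (pvTyp g y) x z := by
      rw [hyt]
      exact hcz
    exact pvConn_trans h1 h2

theorem pvALoop (g : List (List String)) :
    ∀ (R P : List (Int × Int))
      (st : PySem.Set (Int × Int) × List (List (Int × Int)) × List (List (Int × Int))),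
    pvCells g = P ++ R →
    st.1.Nodup →
    (∀ x, x ∈ st.1 ↔ (pvFW g x ∧ pvInb g x ∧ ∃ y ∈ P, pvConn g (pvTyp g x) x y)) →
    ((R.foldl (pvAStep g) st).2.1.countP (fun cl => pvIsolated g cl "Water") =
        st.2.1.countP (fun cl => pvIsolated g cl "Water") +
          R.countP (fun y => @decide (pvCounted g y ∧ pvTyp g y = "Farm")
            (Classical.propDecidable _))) ∧
    ((R.foldl (pvAStep g) st).2.2.countP (fun cl => pvIsolated g cl "Farm") =
        st.2.2.countP (fun cl => pvIsolated g cl "Farm") +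
          R.countP (fun y => @decide (pvCounted g y ∧ pvTyp g y = "Water")
            (Classical.propDecidable _))) := by
  intro R
  induction R with
  | nil => intro P st _ _ _; simp
  | cons x R' ih =>
    intro P st hPR hnd hchar
    have hx_cells : x ∈ pvCells g := by
      rw [hPR]
      simp
    have hInb : pvInb g x := mem_pvCells.1 hx_cells
    have hsorted : (P ++ x :: R').Pairwise cLt := hPR ▸ pvCells_sorted g
    have hPx : ∀ y ∈ P, cLt y x := by
      intro y hy
      exact (List.pairwise_append.1 hsorted).2.2 y hy x (List.mem_cons_self ..)
    have hxR : ∀ y ∈ R', cLt x y := by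
      intro y hy
      exact (List.pairwise_cons.1 (List.pairwise_append.1 hsorted).2.1).1 y hy
    have hxP : x ∉ P := fun h => cLt_irrefl x (hPx x h)
    by_cases hxV : x ∈ st.1
    · -- already visited: the step is a no-op and x is not a counted seed
      have hstepeq : pvAStep g st x = st := by
        unfold pvAStep
        rw [if_neg (by simpa using hxV)]
      have hchar' : ∀ z, z ∈ st.1 ↔
          (pvFW g z ∧ pvInb g z ∧ ∃ y ∈ P ++ [x], pvConn g (pvTyp g z) z y) := by
        intro z
        rw [hchar z]
        constructor
        · rintro ⟨h1, h2, y, hy, hc⟩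
          exact ⟨h1, h2, y, List.mem_append_left _ hy, hc⟩
        · rintro ⟨h1, h2, y, hy, hc⟩
          rcases List.mem_append.1 hy with hy' | hy'
          · exact ⟨h1, h2, y, hy', hc⟩
          · rw [List.mem_singleton] at hy'
            rw [hy'] at hc
            obtain ⟨hFWx, hInbx, y₀, hy₀, hc₀⟩ := (hchar x).1 hxV
            refine ⟨h1, h2, y₀, hy₀, ?_⟩
            rcases pvConn_cases hc with heq | ⟨_, _, hzt, hyt⟩
            · rw [heq]
              exact hc₀
            · have hxz : pvTyp g x = pvTyp g z := hyt
              refine pvConn_trans hc ?_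
              rw [← hxz]
              exact hc₀
      have hncnt : ¬ pvCounted g x := by
        rintro ⟨_, _, hmin, _⟩
        obtain ⟨_, _, y₀, hy₀, hc₀⟩ := (hchar x).1 hxV
        exact cLt_irrefl y₀ (cLt_of_cLt_of_cLe (hPx y₀ hy₀) (hmin y₀ hc₀))
      obtain ⟨ih1, ih2⟩ := ih (P ++ [x]) st (by rw [hPR]; simp) hnd hchar'
      rw [List.foldl_cons, hstepeq]
      constructor
      · rw [ih1, List.countP_cons]
        have hf1 : (@decide (pvCounted g x ∧ pvTyp g x = "Farm")
            (Classical.propDecidable _)) = false :=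
          @decide_eq_false _ (Classical.propDecidable _) (fun h => hncnt h.1)
        rw [hf1]
        simp
      · rw [ih2, List.countP_cons]
        have hf2 : (@decide (pvCounted g x ∧ pvTyp g x = "Water")
            (Classical.propDecidable _)) = false :=
          @decide_eq_false _ (Classical.propDecidable _) (fun h => hncnt h.1)
        rw [hf2]
        simp
    · -- x not yet visited: dispatch on its terrain
      by_cases hFarm : pvAt g x.1 x.2 = "Farm"
      · have htx : pvTyp g x = "Farm" := hFarm
        have hFWx : pvFW g x := Or.inl htx
        have hcl : pvClosed g st.1 := closed_of_char hchar
        obtain ⟨L, hdfs, hndL, hLmem⟩ := pvDfs_spec g "Farm" x st.1 hInb htx hxV hnd hcl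
        have hstepeq : pvAStep g st x = (st.1 ++ L, st.2.1 ++ [L], st.2.2) := by
          unfold pvAStep
          rw [if_pos hxV, if_pos hFarm, hdfs]
        have hminx : ∀ q, pvConn g (pvTyp g x) x q → cLe x q := by
          intro q hq
          have hq_cells : q ∈ pvCells g := by
            rcases pvConn_cases hq with heq | ⟨_, hInbq, _, _⟩
            · rw [← heq]
              exact hx_cells
            · exact mem_pvCells.2 hInbq
          rw [hPR] at hq_cells
          rcases List.mem_append.1 hq_cells with hqP | hqxr
          · exact absurd ((hchar x).2 ⟨hFWx, hInb, q, hqP, hq⟩) hxV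
          · rcases List.mem_cons.1 hqxr with heq | hqR
            · rw [heq]
              exact cLe_refl x
            · exact cLe_of_cLt (hxR q hqR)
        have hchar' : ∀ z, z ∈ st.1 ++ L ↔
            (pvFW g z ∧ pvInb g z ∧ ∃ y ∈ P ++ [x], pvConn g (pvTyp g z) z y) := by
          intro z
          rw [List.mem_append]
          constructor
          · rintro (hz | hzL)
            · obtain ⟨h1, h2, y, hy, hc⟩ := (hchar z).1 hz
              exact ⟨h1, h2, y, List.mem_append_left _ hy, hc⟩
            · have hconn : pvConn g "Farm" x z := (hLmem z).1 hzL
              rcases pvConn_cases hconn with heq | ⟨_, hInbz, _, hzt⟩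
              · rw [← heq]
                exact ⟨hFWx, hInb, x,
                  List.mem_append_right _ (List.mem_singleton.2 rfl),
                  Relation.ReflTransGen.refl⟩
              · refine ⟨Or.inl hzt, hInbz, x,
                  List.mem_append_right _ (List.mem_singleton.2 rfl), ?_⟩
                rw [hzt]
                exact pvConn_symm hconn
          · rintro ⟨h1, h2, y, hy, hc⟩
            rcases List.mem_append.1 hy with hy' | hy'
            · exact Or.inl ((hchar z).2 ⟨h1, h2, y, hy', hc⟩)
            · rw [List.mem_singleton] at hy'
              rw [hy'] at hc
              right
              refine (hLmem z).2 ?_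
              rcases pvConn_cases hc with heq | ⟨_, _, _, hxt2⟩
              · rw [heq]
                exact Relation.ReflTransGen.refl
              · have hzF : pvTyp g z = "Farm" := by
                  rw [← hxt2, htx]
                have h3 := pvConn_symm hc
                rw [hzF] at h3
                exact h3
        have hOpp : pvOpp (pvTyp g x) = "Water" := by
          rw [htx]
          rfl
        have hcnt_iff : (pvIsolated g L "Water" = true) ↔
            (pvCounted g x ∧ pvTyp g x = "Farm") := by
          rw [pvIsolated_iff]
          constructor
          · intro hall
            refine ⟨⟨hFWx, hInb, hminx, ?_⟩, htx⟩
            intro q hq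
            rw [hOpp]
            refine hall q ((hLmem q).2 ?_)
            rw [← htx]
            exact hq
          · rintro ⟨⟨_, _, _, hgood⟩, _⟩
            intro p hp
            have hq : pvConn g (pvTyp g x) x p := by
              rw [htx]
              exact (hLmem p).1 hp
            have h4 := hgood p hq
            rw [hOpp] at h4
            exact h4
        have hother : ¬(pvCounted g x ∧ pvTyp g x = "Water") := by
          rintro ⟨_, hW⟩
          exact absurd (htx.symm.trans hW) (by decide)
        obtain ⟨ih1, ih2⟩ := ih (P ++ [x]) (st.1 ++ L, st.2.1 ++ [L], st.2.2)
          (by rw [hPR]; simp) hndL hchar'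
        rw [List.foldl_cons, hstepeq]
        have hif : (if pvIsolated g L "Water" = true then (1 : Nat) else 0) =
            (if (@decide (pvCounted g x ∧ pvTyp g x = "Farm")
                (Classical.propDecidable _)) = true then 1 else 0) :=
          if_congr (hcnt_iff.trans
            (@decide_eq_true_iff _ (Classical.propDecidable _)).symm) rfl rfl
        have hfalse : (@decide (pvCounted g x ∧ pvTyp g x = "Water")
            (Classical.propDecidable _)) = false :=
          @decide_eq_false (pvCounted g x ∧ pvTyp g x = "Water") (Classical.propDecidable _) hother
        constructor
        · rw [ih1, List.countP_cons]
          rw [List.countP_append]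
          simp only [List.countP_cons, List.countP_nil]
          rw [hif]
          omega
        · rw [ih2, List.countP_cons]
          rw [hfalse]
          simp
      · by_cases hWater : pvAt g x.1 x.2 = "Water"
        · have htx : pvTyp g x = "Water" := hWater
          have hFWx : pvFW g x := Or.inr htx
          have hcl : pvClosed g st.1 := closed_of_char hchar
          obtain ⟨L, hdfs, hndL, hLmem⟩ := pvDfs_spec g "Water" x st.1 hInb htx hxV hnd hcl
          have hstepeq : pvAStep g st x = (st.1 ++ L, st.2.1, st.2.2 ++ [L]) := by
            unfold pvAStep
            rw [if_pos hxV, if_neg hFarm, if_pos hWater, hdfs]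
          have hminx : ∀ q, pvConn g (pvTyp g x) x q → cLe x q := by
            intro q hq
            have hq_cells : q ∈ pvCells g := by
              rcases pvConn_cases hq with heq | ⟨_, hInbq, _, _⟩
              · rw [← heq]
                exact hx_cells
              · exact mem_pvCells.2 hInbq
            rw [hPR] at hq_cells
            rcases List.mem_append.1 hq_cells with hqP | hqxr
            · exact absurd ((hchar x).2 ⟨hFWx, hInb, q, hqP, hq⟩) hxV
            · rcases List.mem_cons.1 hqxr with heq | hqR
              · rw [heq]
                exact cLe_refl x
              · exact cLe_of_cLt (hxR q hqR)
          have hchar' : ∀ z, z ∈ st.1 ++ L ↔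
              (pvFW g z ∧ pvInb g z ∧ ∃ y ∈ P ++ [x], pvConn g (pvTyp g z) z y) := by
            intro z
            rw [List.mem_append]
            constructor
            · rintro (hz | hzL)
              · obtain ⟨h1, h2, y, hy, hc⟩ := (hchar z).1 hz
                exact ⟨h1, h2, y, List.mem_append_left _ hy, hc⟩
              · have hconn : pvConn g "Water" x z := (hLmem z).1 hzL
                rcases pvConn_cases hconn with heq | ⟨_, hInbz, _, hzt⟩
                · rw [← heq]
                  exact ⟨hFWx, hInb, x,
                    List.mem_append_right _ (List.mem_singleton.2 rfl),
                    Relation.ReflTransGen.refl⟩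
                · refine ⟨Or.inr hzt, hInbz, x,
                    List.mem_append_right _ (List.mem_singleton.2 rfl), ?_⟩
                  rw [hzt]
                  exact pvConn_symm hconn
            · rintro ⟨h1, h2, y, hy, hc⟩
              rcases List.mem_append.1 hy with hy' | hy'
              · exact Or.inl ((hchar z).2 ⟨h1, h2, y, hy', hc⟩)
              · rw [List.mem_singleton] at hy'
                rw [hy'] at hc
                right
                refine (hLmem z).2 ?_
                rcases pvConn_cases hc with heq | ⟨_, _, _, hxt2⟩
                · rw [heq]
                  exact Relation.ReflTransGen.refl
                · have hzF : pvTyp g z = "Water" := by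
                    rw [← hxt2, htx]
                  have h3 := pvConn_symm hc
                  rw [hzF] at h3
                  exact h3
          have hOpp : pvOpp (pvTyp g x) = "Farm" := by
            rw [htx]
            rfl
          have hcnt_iff : (pvIsolated g L "Farm" = true) ↔
              (pvCounted g x ∧ pvTyp g x = "Water") := by
            rw [pvIsolated_iff]
            constructor
            · intro hall
              refine ⟨⟨hFWx, hInb, hminx, ?_⟩, htx⟩
              intro q hq
              rw [hOpp]
              refine hall q ((hLmem q).2 ?_)
              rw [← htx]
              exact hq
            · rintro ⟨⟨_, _, _, hgood⟩, _⟩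
              intro p hp
              have hq : pvConn g (pvTyp g x) x p := by
                rw [htx]
                exact (hLmem p).1 hp
              have h4 := hgood p hq
              rw [hOpp] at h4
              exact h4
          have hother : ¬(pvCounted g x ∧ pvTyp g x = "Farm") := by
            rintro ⟨_, hW⟩
            exact absurd (htx.symm.trans hW) (by decide)
          obtain ⟨ih1, ih2⟩ := ih (P ++ [x]) (st.1 ++ L, st.2.1, st.2.2 ++ [L])
            (by rw [hPR]; simp) hndL hchar'
          rw [List.foldl_cons, hstepeq]
          have hif : (if pvIsolated g L "Farm" = true then (1 : Nat) else 0) =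
              (if (@decide (pvCounted g x ∧ pvTyp g x = "Water")
                  (Classical.propDecidable _)) = true then 1 else 0) :=
            if_congr (hcnt_iff.trans
            (@decide_eq_true_iff _ (Classical.propDecidable _)).symm) rfl rfl
          have hfalse : (@decide (pvCounted g x ∧ pvTyp g x = "Farm")
              (Classical.propDecidable _)) = false :=
            @decide_eq_false (pvCounted g x ∧ pvTyp g x = "Farm") (Classical.propDecidable _) hother
          constructor
          · rw [ih1, List.countP_cons]
            rw [hfalse]
            simp
          · rw [ih2, List.countP_cons]
            rw [List.countP_append]
            simp only [List.countP_cons, List.countP_nil]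
            rw [hif]
            omega
        · have hstepeq : pvAStep g st x = st := by
            unfold pvAStep
            rw [if_pos hxV, if_neg hFarm, if_neg hWater]
          have hnFW : ¬ pvFW g x := by
            rintro (h | h)
            · exact hFarm h
            · exact hWater h
          have hchar' : ∀ z, z ∈ st.1 ↔
              (pvFW g z ∧ pvInb g z ∧ ∃ y ∈ P ++ [x], pvConn g (pvTyp g z) z y) := by
            intro z
            rw [hchar z]
            constructor
            · rintro ⟨h1, h2, y, hy, hc⟩
              exact ⟨h1, h2, y, List.mem_append_left _ hy, hc⟩
            · rintro ⟨h1, h2, y, hy, hc⟩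
              rcases List.mem_append.1 hy with hy' | hy'
              · exact ⟨h1, h2, y, hy', hc⟩
              · rw [List.mem_singleton] at hy'
                rw [hy'] at hc
                exfalso
                rcases pvConn_cases hc with heq | ⟨_, _, _, hxt2⟩
                · rw [heq] at h1
                  exact hnFW h1
                · refine hnFW ?_
                  unfold pvFW
                  rw [hxt2]
                  exact h1
          have hncnt : ¬ pvCounted g x := by
            rintro ⟨hFW, _⟩
            exact hnFW hFW
          obtain ⟨ih1, ih2⟩ := ih (P ++ [x]) st (by rw [hPR]; simp) hnd hchar'
          rw [List.foldl_cons, hstepeq]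
          have hf1 : (@decide (pvCounted g x ∧ pvTyp g x = "Farm")
              (Classical.propDecidable _)) = false :=
            @decide_eq_false _ (Classical.propDecidable _) (fun h => hncnt h.1)
          have hf2 : (@decide (pvCounted g x ∧ pvTyp g x = "Water")
              (Classical.propDecidable _)) = false :=
            @decide_eq_false _ (Classical.propDecidable _) (fun h => hncnt h.1)
          constructor
          · rw [ih1, List.countP_cons, hf1]
            simp
          · rw [ih2, List.countP_cons, hf2]
            simp

theorem countP_FW_split (g : List (List String)) :
    (pvCells g).countP (fun y => @decide (pvCounted g y ∧ pvTyp g y = "Farm")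
        (Classical.propDecidable _)) +
      (pvCells g).countP (fun y => @decide (pvCounted g y ∧ pvTyp g y = "Water")
        (Classical.propDecidable _)) =
    (pvCells g).countP (fun p => @decide (pvCounted g p) (Classical.propDecidable _)) := by
  rw [countP_disjoint]
  · apply List.countP_congr
    intro x _
    by_cases hA : pvCounted g x
    · rcases hA.1 with hF | hW
      · simp [@decide_eq_true _ (Classical.propDecidable _) hA,
          @decide_eq_true (pvCounted g x ∧ pvTyp g x = "Farm")
            (Classical.propDecidable _) ⟨hA, hF⟩]
      · simp [@decide_eq_true _ (Classical.propDecidable _) hA,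
          @decide_eq_true (pvCounted g x ∧ pvTyp g x = "Water")
            (Classical.propDecidable _) ⟨hA, hW⟩]
    · simp [@decide_eq_false _ (Classical.propDecidable _) hA,
        @decide_eq_false (pvCounted g x ∧ pvTyp g x = "Farm")
          (Classical.propDecidable _) (fun h => hA h.1),
        @decide_eq_false (pvCounted g x ∧ pvTyp g x = "Water")
          (Classical.propDecidable _) (fun h => hA h.1)]
  · intro x _
    rintro ⟨hf, hw⟩
    have h1 := @of_decide_eq_true (pvCounted g x ∧ pvTyp g x = "Farm")
      (Classical.propDecidable _) hf
    have h2 := @of_decide_eq_true (pvCounted g x ∧ pvTyp g x = "Water")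
      (Classical.propDecidable _) hw
    exact absurd (h1.2.symm.trans h2.2) (by decide)

theorem shoreside_A_val (g : List (List String)) :
    shoreside_progress g = (((pvCells g).countP (fun p => @decide (pvCounted g p) (Classical.propDecidable _)) : Nat) : Int) * 3 := by
  obtain ⟨h1, h2⟩ := pvALoop g (pvCells g) [] ([], [], [])
    (by simp) (by simp) (by intro x; simp)
  rw [shoreside_eq_foldl]
  rw [PySem.List.foldl_count_if, PySem.List.foldl_count_if]
  rw [h1, h2]
  rw [← countP_FW_split g]
  simp only [List.countP_nil]
  push_cast
  ring

-- ---------- union-find (port B) ----------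
def pvPar (par : PySem.Dict (Int × Int) (Int × Int)) (x : Int × Int) : Int × Int :=
  par.getD x x
def pvREdge (E : List ((Int × Int) × (Int × Int))) : (Int × Int) → (Int × Int) → Prop :=
  fun a b => (a, b) ∈ E
def pvR (E : List ((Int × Int) × (Int × Int))) : (Int × Int) → (Int × Int) → Prop :=
  Relation.EqvGen (pvREdge E)
def pvRight (p : Int × Int) : Int × Int := (p.1, p.2 + 1)
def pvDown (p : Int × Int) : Int × Int := (p.1 + 1, p.2)
def pvEdges (g : List (List String)) : List ((Int × Int) × (Int × Int)) :=
  (pvCells g).flatMap (fun x =>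
    (if (pvTyp g x = "Farm" ∨ pvTyp g x = "Water") ∧ x.2 + 1 < pvW g ∧
        pvTyp g (pvRight x) = pvTyp g x then [(x, pvRight x)] else []) ++
    (if (pvTyp g x = "Farm" ∨ pvTyp g x = "Water") ∧ x.1 + 1 < pvH g ∧
        pvTyp g (pvDown x) = pvTyp g x then [(x, pvDown x)] else []))

def pvInv (g : List (List String)) (par : PySem.Dict (Int × Int) (Int × Int))
    (E : List ((Int × Int) × (Int × Int))) : Prop :=
  (∀ x, cLe (pvPar par x) x) ∧
  (∀ x, pvR E x (pvPar par x)) ∧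
  (∀ x, pvPar par x = x → ∀ y, pvR E x y → cLe x y) ∧
  (∀ x, pvPar par x ≠ x → pvInb g x ∧ pvInb g (pvPar par x))

theorem pvR_mono_append {E : List ((Int × Int) × (Int × Int))}
    {e : (Int × Int) × (Int × Int)} {x y : Int × Int} (h : pvR E x y) :
    pvR (E ++ [e]) x y := by
  refine Relation.EqvGen.mono ?_ h
  intro a b hab
  exact List.mem_append_left _ hab

theorem pvR_symm {E : List ((Int × Int) × (Int × Int))} {x y : Int × Int}
    (h : pvR E x y) : pvR E y x := Relation.EqvGen.symm _ _ h

theorem pvR_trans {E : List ((Int × Int) × (Int × Int))} {x y z : Int × Int}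
    (h1 : pvR E x y) (h2 : pvR E y z) : pvR E x z := Relation.EqvGen.trans _ _ _ h1 h2

theorem pvR_nil {x y : Int × Int} : pvR [] x y ↔ x = y := by
  constructor
  · intro h
    induction h with
    | rel _ _ h => exact (List.not_mem_nil h).elim
    | refl => rfl
    | symm _ _ _ ih => exact ih.symm
    | trans _ _ _ _ _ ih1 ih2 => exact ih1.trans ih2
  · rintro rfl
    exact Relation.EqvGen.refl x
theorem pvR_append_pair {E : List ((Int × Int) × (Int × Int))} {a b x y : Int × Int} :
    pvR (E ++ [(a, b)]) x y ↔
      pvR E x y ∨ (pvR E x a ∧ pvR E b y) ∨ (pvR E x b ∧ pvR E a y) := by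
  constructor
  · intro h
    induction h with
    | rel u v huv =>
      rcases List.mem_append.1 huv with h' | h'
      · exact Or.inl (Relation.EqvGen.rel _ _ h')
      · rw [List.mem_singleton] at h'
        injection h' with h1 h2
        subst h1
        subst h2
        exact Or.inr (Or.inl ⟨Relation.EqvGen.refl _, Relation.EqvGen.refl _⟩)
    | refl => exact Or.inl (Relation.EqvGen.refl _)
    | symm u v _ ih =>
      rcases ih with h' | ⟨h1, h2⟩ | ⟨h1, h2⟩
      · exact Or.inl (pvR_symm h')
      · exact Or.inr (Or.inr ⟨pvR_symm h2, pvR_symm h1⟩)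
      · exact Or.inr (Or.inl ⟨pvR_symm h2, pvR_symm h1⟩)
    | trans u v w _ _ ih1 ih2 =>
      rcases ih1 with h1 | ⟨h1, h1'⟩ | ⟨h1, h1'⟩ <;>
        rcases ih2 with h2 | ⟨h2, h2'⟩ | ⟨h2, h2'⟩
      · exact Or.inl (pvR_trans h1 h2)
      · exact Or.inr (Or.inl ⟨pvR_trans h1 h2, h2'⟩)
      · exact Or.inr (Or.inr ⟨pvR_trans h1 h2, h2'⟩)
      · exact Or.inr (Or.inl ⟨h1, pvR_trans h1' h2⟩)
      · exact Or.inl (pvR_trans h1 (pvR_trans (pvR_symm (pvR_trans h1' h2)) h2'))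
      · exact Or.inl (pvR_trans h1 h2')
      · exact Or.inr (Or.inr ⟨h1, pvR_trans h1' h2⟩)
      · exact Or.inl (pvR_trans h1 h2')
      · exact Or.inl (pvR_trans h1 (pvR_trans (pvR_symm (pvR_trans h1' h2)) h2'))
  · rintro (h | ⟨h1, h2⟩ | ⟨h1, h2⟩)
    · exact pvR_mono_append h
    · exact pvR_trans (pvR_mono_append h1)
        (pvR_trans (Relation.EqvGen.rel _ _ (List.mem_append_right _ (List.mem_singleton.2 rfl)))
          (pvR_mono_append h2))
    · exact pvR_trans (pvR_mono_append h1)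
        (pvR_trans (pvR_symm (Relation.EqvGen.rel _ _ (List.mem_append_right _ (List.mem_singleton.2 rfl))))
          (pvR_mono_append h2))

def pvMu (g : List (List String)) (x : Int × Int) : Nat :=
  (pvCells g).countP (fun y => cLeB y x)

theorem countP_lt {α : Type} {l : List α} {p q : α → Bool}
    (hmono : ∀ z ∈ l, p z = true → q z = true) {x : α} (hx : x ∈ l)
    (hqx : q x = true) (hpx : p x = false) : l.countP p < l.countP q := by
  induction l with
  | nil => simp at hx
  | cons a l ih =>
    rw [List.countP_cons, List.countP_cons]
    have hmono' : ∀ z ∈ l, p z = true → q z = true :=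
      fun z hz => hmono z (List.mem_cons_of_mem _ hz)
    rcases List.mem_cons.1 hx with heq | hx'
    · have hle : l.countP p ≤ l.countP q := List.countP_mono_left hmono'
      rw [← heq, hpx, hqx]
      simp
      omega
    · have hlt := ih hmono' hx'
      by_cases hpa : p a = true
      · rw [if_pos hpa, if_pos (hmono a (List.mem_cons_self ..) hpa)]
        omega
      · rw [if_neg hpa]
        by_cases hqa : q a = true
        · rw [if_pos hqa]
          omega
        · rw [if_neg hqa]
          omega

theorem cLt_of_cLe_of_ne {p q : Int × Int} (h : cLe p q) (hne : p ≠ q) : cLt p q := by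
  obtain ⟨a, b⟩ := p
  obtain ⟨c, d⟩ := q
  unfold cLe at h
  unfold cLt
  simp only [ne_eq, Prod.mk.injEq, not_and] at hne
  dsimp only at h ⊢
  omega

theorem cLt_of_cLe_of_cLt {p q r : Int × Int} (h1 : cLe p q) (h2 : cLt q r) : cLt p r := by
  unfold cLe cLt at *
  omega

theorem cLt_total_of_ne {p q : Int × Int} (hne : p ≠ q) : cLt p q ∨ cLt q p := by
  obtain ⟨a, b⟩ := p
  obtain ⟨c, d⟩ := q
  simp only [ne_eq, Prod.mk.injEq, not_and] at hne
  unfold cLt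
  dsimp only
  omega

theorem pvPairLtB_iff {p q : Int × Int} : pvPairLtB p q = true ↔ cLt p q := by
  unfold pvPairLtB cLt
  simp

theorem pvMu_le (g : List (List String)) (x : Int × Int) :
    pvMu g x ≤ g.length * (PySem.List.pyGetD g 0 []).length := by
  unfold pvMu
  calc (pvCells g).countP (fun y => cLeB y x) ≤ (pvCells g).length := List.countP_le_length
    _ = _ := length_pvCells g

theorem pvMu_lt {g : List (List String)} {x : Int × Int} (hx : pvInb g x)
    {y : Int × Int} (hy : pvInb g y) (h : cLt y x) : pvMu g y < pvMu g x := by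
  unfold pvMu
  refine countP_lt ?_ (mem_pvCells.2 hx) (cLeB_iff.2 (cLe_refl x)) ?_
  · intro z _ hz
    exact cLeB_iff.2 (cLe_of_cLt (cLt_of_cLe_of_cLt (cLeB_iff.1 hz) h))
  · cases hb : cLeB x y
    · rfl
    · exact absurd (cLt_of_cLe_of_cLt (cLeB_iff.1 hb) h) (cLt_irrefl x)

theorem pvFind_spec {g : List (List String)} {par : PySem.Dict (Int × Int) (Int × Int)}
    {E : List ((Int × Int) × (Int × Int))} (hinv : pvInv g par E) :
    ∀ (fuel : Nat) (x : Int × Int), pvMu g x ≤ fuel →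
      pvPar par (pvFind par fuel x) = pvFind par fuel x ∧
      pvR E x (pvFind par fuel x) ∧ cLe (pvFind par fuel x) x ∧
      (pvInb g (pvFind par fuel x) ∨ pvFind par fuel x = x) := by
  obtain ⟨i1, i2, i3, i5⟩ := hinv
  intro fuel
  induction fuel with
  | zero =>
    intro x hμ
    have hroot : pvPar par x = x := by
      by_contra hne
      have hInbx := (i5 x hne).1
      have : 0 < pvMu g x := by
        unfold pvMu
        rw [List.countP_pos_iff]
        exact ⟨x, mem_pvCells.2 hInbx, cLeB_iff.2 (cLe_refl x)⟩
      omega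
    exact ⟨hroot, Relation.EqvGen.refl x, cLe_refl x, Or.inr rfl⟩
  | succ fuel ih =>
    intro x hμ
    by_cases hp : pvPar par x = x
    · have hp' : par.getD x x = x := hp
      have hfx : pvFind par (fuel + 1) x = x := by
        simp only [pvFind]
        rw [if_pos hp']
      rw [hfx]
      exact ⟨hp, Relation.EqvGen.refl x, cLe_refl x, Or.inr rfl⟩
    · have hp' : ¬ par.getD x x = x := hp
      obtain ⟨hInbx, hInbπ⟩ := i5 x hp
      have hlt : cLt (pvPar par x) x := cLt_of_cLe_of_ne (i1 x) hp
      have hμ' : pvMu g (pvPar par x) ≤ fuel := by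
        have := pvMu_lt hInbx hInbπ hlt
        omega
      have hfx : pvFind par (fuel + 1) x = pvFind par fuel (pvPar par x) := by
        simp only [pvFind]
        rw [if_neg hp']
        rfl
      obtain ⟨h1, h2, h3, h4⟩ := ih (pvPar par x) hμ'
      rw [hfx]
      refine ⟨h1, pvR_trans (i2 x) h2, cLe_trans h3 (i1 x), ?_⟩
      rcases h4 with h | h
      · exact Or.inl h
      · rw [h]
        exact Or.inl hInbπ

theorem pvLink_inv {g : List (List String)} {par : PySem.Dict (Int × Int) (Int × Int)}
    {E : List ((Int × Int) × (Int × Int))} (hinv : pvInv g par E)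
    {a b rA rB rmax rmin : Int × Int}
    (hRA : pvR E a rA) (hRB : pvR E b rB)
    (hrootA : pvPar par rA = rA) (hrootB : pvPar par rB = rB)
    (hcase : (rA = rmax ∧ rB = rmin) ∨ (rA = rmin ∧ rB = rmax))
    (hrootMax : pvPar par rmax = rmax)
    (hInbMax : pvInb g rmax) (hInbMin : pvInb g rmin)
    (hne : rmax ≠ rmin) (hlt : cLt rmin rmax) :
    pvInv g (par.insert rmax rmin) (E ++ [(a, b)]) := by
  obtain ⟨i1, i2, i3, i5⟩ := hinv
  have huniq : ∀ r₁ r₂, pvPar par r₁ = r₁ → pvPar par r₂ = r₂ → pvR E r₁ r₂ → r₁ = r₂ := by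
    intro r₁ r₂ h₁ h₂ hR12
    exact cLe_antisymm (i3 r₁ h₁ r₂ hR12) (i3 r₂ h₂ r₁ (pvR_symm hR12))
  have hπ' : ∀ x, pvPar (par.insert rmax rmin) x = if x = rmax then rmin else pvPar par x := by
    intro x
    unfold pvPar
    rw [PySem.Dict.getD_insert]
  have hbridge : pvR (E ++ [(a, b)]) rmax rmin := by
    have hpair : pvR (E ++ [(a, b)]) a b :=
      Relation.EqvGen.rel _ _ (List.mem_append_right _ (List.mem_singleton.2 rfl))
    rcases hcase with ⟨hA, hB⟩ | ⟨hA, hB⟩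
    · rw [← hA, ← hB]
      exact pvR_trans (pvR_symm (pvR_mono_append hRA)) (pvR_trans hpair (pvR_mono_append hRB))
    · rw [← hB, ← hA]
      exact pvR_trans (pvR_symm (pvR_mono_append hRB))
        (pvR_trans (pvR_symm hpair) (pvR_mono_append hRA))
  refine ⟨?_, ?_, ?_, ?_⟩
  · intro x
    rw [hπ']
    by_cases hx : x = rmax
    · rw [if_pos hx, hx]
      exact cLe_of_cLt hlt
    · rw [if_neg hx]
      exact i1 x
  · intro x
    rw [hπ']
    by_cases hx : x = rmax
    · rw [if_pos hx, hx]
      exact hbridge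
    · rw [if_neg hx]
      exact pvR_mono_append (i2 x)
  · intro x hx y hy
    rw [hπ'] at hx
    by_cases hxa : x = rmax
    · rw [if_pos hxa] at hx
      exact absurd (hx.trans hxa).symm hne
    · rw [if_neg hxa] at hx
      rcases pvR_append_pair.1 hy with h | ⟨h1, h2⟩ | ⟨h1, h2⟩
      · exact i3 x hx y h
      · -- x is the root of a's class
        have hxA : x = rA := huniq x rA hx hrootA (pvR_trans h1 hRA)
        rcases hcase with ⟨hA, hB⟩ | ⟨hA, hB⟩
        · exact absurd (hxA.trans hA) hxa
        · -- rA = rmin, rB = rmax: y lies in rmax's old class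
          have hy' : cLe rmax y := by
            rw [← hB]
            exact i3 rB hrootB y (pvR_trans (pvR_symm hRB) h2)
          rw [hxA, hA]
          exact cLe_trans (cLe_of_cLt hlt) hy'
      · have hxB : x = rB := huniq x rB hx hrootB (pvR_trans h1 hRB)
        rcases hcase with ⟨hA, hB⟩ | ⟨hA, hB⟩
        · have hy' : cLe rmax y := by
            rw [← hA]
            exact i3 rA hrootA y (pvR_trans (pvR_symm hRA) h2)
          rw [hxB, hB]
          exact cLe_trans (cLe_of_cLt hlt) hy'
        · exact absurd (hxB.trans hB) hxa
  · intro x hxne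
    rw [hπ'] at hxne
    rw [hπ']
    by_cases hx : x = rmax
    · rw [if_pos hx]
      rw [hx]
      exact ⟨hInbMax, hInbMin⟩
    · rw [if_neg hx] at hxne
      rw [if_neg hx]
      exact i5 x hxne

theorem pvUnion_inv {g : List (List String)} {par : PySem.Dict (Int × Int) (Int × Int)}
    {E : List ((Int × Int) × (Int × Int))} (hinv : pvInv g par E) {a b : Int × Int}
    (ha : pvInb g a) (hb : pvInb g b) :
    pvInv g (pvUnion par (g.length * (PySem.List.pyGetD g 0 []).length) a b)
      (E ++ [(a, b)]) := by
  obtain ⟨hrootA, hRA, hleA, hInbA⟩ := pvFind_spec hinv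
    (g.length * (PySem.List.pyGetD g 0 []).length) a (pvMu_le g a)
  obtain ⟨hrootB, hRB, hleB, hInbB⟩ := pvFind_spec hinv
    (g.length * (PySem.List.pyGetD g 0 []).length) b (pvMu_le g b)
  have hInbra : pvInb g (pvFind par (g.length * (PySem.List.pyGetD g 0 []).length) a) := by
    rcases hInbA with h | h
    · exact h
    · rw [h]
      exact ha
  have hInbrb : pvInb g (pvFind par (g.length * (PySem.List.pyGetD g 0 []).length) b) := by
    rcases hInbB with h | h
    · exact h
    · rw [h]
      exact hb
  unfold pvUnion
  by_cases heq : pvFind par (g.length * (PySem.List.pyGetD g 0 []).length) a =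
      pvFind par (g.length * (PySem.List.pyGetD g 0 []).length) b
  · rw [if_pos heq]
    obtain ⟨i1, i2, i3, i5⟩ := hinv
    have huniq : ∀ r₁ r₂, pvPar par r₁ = r₁ → pvPar par r₂ = r₂ → pvR E r₁ r₂ → r₁ = r₂ := by
      intro r₁ r₂ h₁ h₂ hR12
      exact cLe_antisymm (i3 r₁ h₁ r₂ hR12) (i3 r₂ h₂ r₁ (pvR_symm hR12))
    refine ⟨i1, fun x => pvR_mono_append (i2 x), ?_, i5⟩
    intro x hx y hy
    rcases pvR_append_pair.1 hy with h | ⟨h1, h2⟩ | ⟨h1, h2⟩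
    · exact i3 x hx y h
    · have hxa : x = pvFind par (g.length * (PySem.List.pyGetD g 0 []).length) a :=
        huniq x _ hx hrootA (pvR_trans h1 hRA)
      refine i3 x hx y ?_
      rw [hxa, heq]
      exact pvR_trans (pvR_symm hRB) h2
    · have hxb : x = pvFind par (g.length * (PySem.List.pyGetD g 0 []).length) b :=
        huniq x _ hx hrootB (pvR_trans h1 hRB)
      refine i3 x hx y ?_
      rw [hxb, ← heq]
      exact pvR_trans (pvR_symm hRA) h2
  · rw [if_neg heq]
    by_cases hlt : pvPairLtB (pvFind par (g.length * (PySem.List.pyGetD g 0 []).length) b)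
        (pvFind par (g.length * (PySem.List.pyGetD g 0 []).length) a) = true
    · rw [if_pos hlt]
      exact pvLink_inv hinv hRA hRB hrootA hrootB (Or.inl ⟨rfl, rfl⟩) hrootA
        hInbra hInbrb heq (pvPairLtB_iff.1 hlt)
    · rw [if_neg hlt]
      have hlt' : cLt (pvFind par (g.length * (PySem.List.pyGetD g 0 []).length) a)
          (pvFind par (g.length * (PySem.List.pyGetD g 0 []).length) b) := by
        rcases cLt_total_of_ne heq with h | h
        · exact h
        · exact absurd (pvPairLtB_iff.2 h) (by simpa using hlt)
      exact pvLink_inv hinv hRA hRB hrootA hrootB (Or.inr ⟨rfl, rfl⟩) hrootB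
        hInbrb hInbra (fun h => heq h.symm) hlt' 

theorem mem_pvEdges {g : List (List String)} {a b : Int × Int} :
    (a, b) ∈ pvEdges g ↔
      pvInb g a ∧ pvFW g a ∧ pvTyp g b = pvTyp g a ∧
        ((b = pvRight a ∧ a.2 + 1 < pvW g) ∨ (b = pvDown a ∧ a.1 + 1 < pvH g)) := by
  unfold pvEdges
  rw [List.mem_flatMap]
  constructor
  · rintro ⟨u, hu, hmem⟩
    rw [List.mem_append] at hmem
    rcases hmem with h | h
    · split_ifs at h with hc
      · rw [List.mem_singleton] at h
        injection h with h1 h2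
        subst h1
        subst h2
        exact ⟨mem_pvCells.1 hu, hc.1, hc.2.2, Or.inl ⟨rfl, hc.2.1⟩⟩
      · exact (List.not_mem_nil h).elim
    · split_ifs at h with hc
      · rw [List.mem_singleton] at h
        injection h with h1 h2
        subst h1
        subst h2
        exact ⟨mem_pvCells.1 hu, hc.1, hc.2.2, Or.inr ⟨rfl, hc.2.1⟩⟩
      · exact (List.not_mem_nil h).elim
  · rintro ⟨hInb, hFW, htyp, hcase⟩
    refine ⟨a, mem_pvCells.2 hInb, ?_⟩
    rw [List.mem_append]
    rcases hcase with ⟨hb, hw⟩ | ⟨hb, hh⟩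
    · left
      rw [if_pos ⟨hFW, hw, by rw [← hb]; exact htyp⟩, hb]
      exact List.mem_singleton.2 rfl
    · right
      rw [if_pos ⟨hFW, hh, by rw [← hb]; exact htyp⟩, hb]
      exact List.mem_singleton.2 rfl

theorem pvEdges_inb {g : List (List String)} {a b : Int × Int}
    (h : (a, b) ∈ pvEdges g) : pvInb g a ∧ pvInb g b := by
  obtain ⟨hInb, _, _, hcase⟩ := mem_pvEdges.1 h
  obtain ⟨h1, h2, h3, h4⟩ := hInb
  refine ⟨⟨h1, h2, h3, h4⟩, ?_⟩
  rcases hcase with ⟨rfl, hw⟩ | ⟨rfl, hh⟩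
  · exact ⟨h1, h2, by dsimp [pvRight]; omega, by dsimp [pvRight]; omega⟩
  · exact ⟨by dsimp [pvDown]; omega, by dsimp [pvDown]; omega, h3, h4⟩

theorem pvEdge_step {g : List (List String)} {a b : Int × Int}
    (h : (a, b) ∈ pvEdges g) : pvStep g (pvTyp g a) a b := by
  obtain ⟨hInba, hInbb⟩ := pvEdges_inb h
  obtain ⟨_, _, htyp, hcase⟩ := mem_pvEdges.1 h
  refine ⟨hInba, hInbb, rfl, htyp, ?_⟩
  rcases hcase with ⟨rfl, _⟩ | ⟨rfl, _⟩
  · exact ⟨(0, 1), by unfold pvDirs; simp, by unfold pvRight; simp⟩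
  · exact ⟨(1, 0), by unfold pvDirs; simp, by unfold pvDown; simp⟩

theorem pvFW_of_typ_eq {g : List (List String)} {u v : Int × Int}
    (h : pvTyp g u = pvTyp g v) (hv : pvFW g v) : pvFW g u := by
  unfold pvFW at *
  rw [h]
  exact hv

theorem pvR_edges_char {g : List (List String)} {x y : Int × Int} :
    pvR (pvEdges g) x y ↔
      x = y ∨ (pvFW g x ∧ pvInb g x ∧ pvConn g (pvTyp g x) x y) := by
  constructor
  · intro h
    induction h with
    | rel u v huv =>
      have hst := pvEdge_step huv
      obtain ⟨hInb, hFW, _, _⟩ := mem_pvEdges.1 huv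
      exact Or.inr ⟨hFW, hInb, Relation.ReflTransGen.single hst⟩
    | refl => exact Or.inl rfl
    | symm u v _ ih =>
      rcases ih with heq | ⟨hFW, hInb, hconn⟩
      · exact Or.inl heq.symm
      · rcases pvConn_cases hconn with heq | ⟨_, hInbv, hut, hvt⟩
        · exact Or.inl heq.symm
        · refine Or.inr ⟨pvFW_of_typ_eq (hvt.trans hut.symm) hFW, hInbv, ?_⟩
          rw [show pvTyp g v = pvTyp g u from hvt.trans hut.symm]
          exact pvConn_symm hconn
    | trans u v w _ _ ih1 ih2 =>
      rcases ih1 with heq | ⟨hFW1, hInb1, hc1⟩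
      · rw [heq]
        exact ih2
      · rcases ih2 with heq | ⟨hFW2, hInb2, hc2⟩
        · rw [← heq]
          exact Or.inr ⟨hFW1, hInb1, hc1⟩
        · refine Or.inr ⟨hFW1, hInb1, pvConn_trans hc1 ?_⟩
          rcases pvConn_cases hc1 with heq | ⟨_, _, _, hvt⟩
          · rw [heq]
            exact hc2
          · rw [← hvt]
            exact hc2
  · rintro (rfl | ⟨hFW, hInb, hconn⟩)
    · exact Relation.EqvGen.refl x
    · induction hconn with
      | refl => exact Relation.EqvGen.refl x
      | tail h1 h2 ih =>
        refine Relation.EqvGen.trans _ _ _ ih ?_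
        rename_i y z
        obtain ⟨hInby, hInbz, hyt, hzt, hadj⟩ := h2
        have hFWy : pvFW g y := by
          unfold pvFW at hFW ⊢
          rw [hyt]
          exact hFW
        have hFWz : pvFW g z := by
          unfold pvFW at hFW ⊢
          rw [hzt]
          exact hFW
        obtain ⟨hy1, hy2, hy3, hy4⟩ := hInby
        obtain ⟨hz1, hz2, hz3, hz4⟩ := hInbz
        obtain ⟨d, hd, hz⟩ := hadj
        unfold pvDirs at hd
        simp only [List.mem_cons, List.not_mem_nil, or_false] at hd
        rcases hd with rfl | rfl | rfl | rfl
        · refine Relation.EqvGen.rel _ _ (mem_pvEdges.2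
            ⟨⟨hy1, hy2, hy3, hy4⟩, hFWy, ?_, Or.inr ⟨?_, ?_⟩⟩)
          · rw [hzt, hyt]
          · rw [hz]
            unfold pvDown
            simp
          · rw [hz] at hz2
            dsimp at hz2
            omega
        · refine Relation.EqvGen.symm _ _ (Relation.EqvGen.rel _ _ (mem_pvEdges.2
            ⟨⟨hz1, hz2, hz3, hz4⟩, hFWz, ?_, Or.inr ⟨?_, ?_⟩⟩))
          · rw [hzt, hyt]
          · rw [hz]
            unfold pvDown
            ext <;> dsimp <;> omega
          · rw [hz]
            dsimp
            omega
        · refine Relation.EqvGen.rel _ _ (mem_pvEdges.2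
            ⟨⟨hy1, hy2, hy3, hy4⟩, hFWy, ?_, Or.inl ⟨?_, ?_⟩⟩)
          · rw [hzt, hyt]
          · rw [hz]
            unfold pvRight
            simp
          · rw [hz] at hz4
            dsimp at hz4
            omega
        · refine Relation.EqvGen.symm _ _ (Relation.EqvGen.rel _ _ (mem_pvEdges.2
            ⟨⟨hz1, hz2, hz3, hz4⟩, hFWz, ?_, Or.inl ⟨?_, ?_⟩⟩))
          · rw [hzt, hyt]
          · rw [hz]
            unfold pvRight
            ext <;> dsimp <;> omega
          · rw [hz]
            dsimp
            omega


-- ---------- B-side loop bodies as folds over the cell list ----------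
theorem foldl_cells_gen {σ : Type} (g : List (List String)) (f : σ → (Int × Int) → σ)
    (init : σ) :
    (pvCells g).foldl f init =
      (PySem.List.pyRange 0 (g.length : Int) 1).foldl
        (fun s r => (PySem.List.pyRange 0 ((PySem.List.pyGetD g 0 []).length : Int) 1).foldl
          (fun s c => f s (r, c)) s) init := by
  unfold pvCells pvH pvW
  rw [List.foldl_flatMap]
  simp only [List.foldl_map]

def pvParent0 (g : List (List String)) : PySem.Dict (Int × Int) (Int × Int) :=
  (pvCells g).foldl (fun d p => d.insert p p) PySem.Dict.empty

def pvBStep (g : List (List String)) (par : PySem.Dict (Int × Int) (Int × Int))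
    (x : Int × Int) : PySem.Dict (Int × Int) (Int × Int) :=
  let t := pvAt g x.1 x.2
  if t = "Farm" ∨ t = "Water" then
    let par := if x.2 + 1 < ((PySem.List.pyGetD g 0 []).length : Int) ∧
        pvAt g x.1 (x.2 + 1) = t then
      pvUnion par (g.length * (PySem.List.pyGetD g 0 []).length) x (x.1, x.2 + 1)
    else par
    if x.1 + 1 < (g.length : Int) ∧ pvAt g (x.1 + 1) x.2 = t then
      pvUnion par (g.length * (PySem.List.pyGetD g 0 []).length) x (x.1 + 1, x.2)
    else par
  else par

def pvParentF (g : List (List String)) : PySem.Dict (Int × Int) (Int × Int) :=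
  (pvCells g).foldl (pvBStep g) (pvParent0 g)

def pvBadCond (g : List (List String)) (x : Int × Int) : Prop :=
  x.1 = 0 ∨ x.1 = pvH g - 1 ∨ x.2 = 0 ∨ x.2 = pvW g - 1 ∨
    pvAt g (x.1 - 1) x.2 = pvOpp (pvTyp g x) ∨ pvAt g (x.1 + 1) x.2 = pvOpp (pvTyp g x) ∨
    pvAt g x.1 (x.2 - 1) = pvOpp (pvTyp g x) ∨ pvAt g x.1 (x.2 + 1) = pvOpp (pvTyp g x)

def pvBadStep (g : List (List String)) (parent : PySem.Dict (Int × Int) (Int × Int))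
    (bd : PySem.Set (Int × Int)) (x : Int × Int) : PySem.Set (Int × Int) :=
  let t := pvAt g x.1 x.2
  if t = "Farm" ∨ t = "Water" then
    if x.1 = 0 ∨ x.1 = (g.length : Int) - 1 ∨ x.2 = 0 ∨
        x.2 = ((PySem.List.pyGetD g 0 []).length : Int) - 1 ∨
        pvAt g (x.1 - 1) x.2 = (if t = "Farm" then "Water" else "Farm") ∨
        pvAt g (x.1 + 1) x.2 = (if t = "Farm" then "Water" else "Farm") ∨
        pvAt g x.1 (x.2 - 1) = (if t = "Farm" then "Water" else "Farm") ∨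
        pvAt g x.1 (x.2 + 1) = (if t = "Farm" then "Water" else "Farm") then
      PySem.Set.add bd (pvFind parent (g.length * (PySem.List.pyGetD g 0 []).length) x)
    else bd
  else bd

def pvBadSet (g : List (List String)) : PySem.Set (Int × Int) :=
  (pvCells g).foldl (pvBadStep g (pvParentF g)) PySem.Set.empty

def pvCntStep (g : List (List String)) (parent : PySem.Dict (Int × Int) (Int × Int))
    (bad : PySem.Set (Int × Int)) (ct : Int) (x : Int × Int) : Int :=
  let t := pvAt g x.1 x.2
  if (t = "Farm" ∨ t = "Water") ∧
      pvFind parent (g.length * (PySem.List.pyGetD g 0 []).length) x = x ∧ x ∉ bad then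
    ct + 1
  else ct

theorem alt_eq (g : List (List String)) (hg : ¬ (g.length : Int) = 0) :
    shoreside_progress_alt g =
      ((pvCells g).foldl (pvCntStep g (pvParentF g) (pvBadSet g)) 0) * 3 := by
  simp only [shoreside_progress_alt, pvCntStep, pvBadSet, pvBadStep, pvParentF, pvBStep,
    pvParent0]
  rw [if_neg hg]
  rw [foldl_cells_gen, foldl_cells_gen, foldl_cells_gen, foldl_cells_gen]
  rfl

-- ---------- the union loop processes exactly the edge list ----------
theorem pvBStep_eq (g : List (List String)) (par : PySem.Dict (Int × Int) (Int × Int))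
    (x : Int × Int) :
    pvBStep g par x =
      ((if (pvTyp g x = "Farm" ∨ pvTyp g x = "Water") ∧ x.2 + 1 < pvW g ∧
          pvTyp g (pvRight x) = pvTyp g x then [(x, pvRight x)] else []) ++
       (if (pvTyp g x = "Farm" ∨ pvTyp g x = "Water") ∧ x.1 + 1 < pvH g ∧
          pvTyp g (pvDown x) = pvTyp g x then [(x, pvDown x)] else [])).foldl
        (fun par e => pvUnion par (g.length * (PySem.List.pyGetD g 0 []).length) e.1 e.2)
        par := by
  simp only [pvBStep]
  by_cases hFW : pvAt g x.1 x.2 = "Farm" ∨ pvAt g x.1 x.2 = "Water"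
  · rw [if_pos hFW]
    by_cases h1 : x.2 + 1 < ((PySem.List.pyGetD g 0 []).length : Int) ∧
        pvAt g x.1 (x.2 + 1) = pvAt g x.1 x.2
    · rw [if_pos h1, if_pos (show (pvTyp g x = "Farm" ∨ pvTyp g x = "Water") ∧ x.2 + 1 < pvW g ∧ pvTyp g (pvRight x) = pvTyp g x from ⟨hFW, h1.1, h1.2⟩)]
      by_cases h2 : x.1 + 1 < (g.length : Int) ∧ pvAt g (x.1 + 1) x.2 = pvAt g x.1 x.2
      · rw [if_pos h2, if_pos (show (pvTyp g x = "Farm" ∨ pvTyp g x = "Water") ∧ x.1 + 1 < pvH g ∧ pvTyp g (pvDown x) = pvTyp g x from ⟨hFW, h2.1, h2.2⟩)]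
        rfl
      · rw [if_neg h2, if_neg (show ¬((pvTyp g x = "Farm" ∨ pvTyp g x = "Water") ∧ x.1 + 1 < pvH g ∧ pvTyp g (pvDown x) = pvTyp g x) from fun hc => h2 ⟨hc.2.1, hc.2.2⟩)]
        rfl
    · rw [if_neg h1, if_neg (show ¬((pvTyp g x = "Farm" ∨ pvTyp g x = "Water") ∧ x.2 + 1 < pvW g ∧ pvTyp g (pvRight x) = pvTyp g x) from fun hc => h1 ⟨hc.2.1, hc.2.2⟩)]
      by_cases h2 : x.1 + 1 < (g.length : Int) ∧ pvAt g (x.1 + 1) x.2 = pvAt g x.1 x.2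
      · rw [if_pos h2, if_pos (show (pvTyp g x = "Farm" ∨ pvTyp g x = "Water") ∧ x.1 + 1 < pvH g ∧ pvTyp g (pvDown x) = pvTyp g x from ⟨hFW, h2.1, h2.2⟩)]
        rfl
      · rw [if_neg h2, if_neg (show ¬((pvTyp g x = "Farm" ∨ pvTyp g x = "Water") ∧ x.1 + 1 < pvH g ∧ pvTyp g (pvDown x) = pvTyp g x) from fun hc => h2 ⟨hc.2.1, hc.2.2⟩)]
        rfl
  · rw [if_neg hFW, if_neg (show ¬((pvTyp g x = "Farm" ∨ pvTyp g x = "Water") ∧ x.2 + 1 < pvW g ∧ pvTyp g (pvRight x) = pvTyp g x) from fun hc => hFW hc.1),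
      if_neg (show ¬((pvTyp g x = "Farm" ∨ pvTyp g x = "Water") ∧ x.1 + 1 < pvH g ∧ pvTyp g (pvDown x) = pvTyp g x) from fun hc => hFW hc.1)]
    rfl

theorem parentF_foldl_edges (g : List (List String)) :
    pvParentF g = (pvEdges g).foldl
      (fun par e => pvUnion par (g.length * (PySem.List.pyGetD g 0 []).length) e.1 e.2)
      (pvParent0 g) := by
  unfold pvParentF pvEdges
  rw [List.foldl_flatMap]
  congr 1
  funext par x
  exact pvBStep_eq g par x

theorem parent0_par (g : List (List String)) (x : Int × Int) :
    pvPar (pvParent0 g) x = x := by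
  unfold pvParent0
  have hgen : ∀ (l : List (Int × Int)) (d : PySem.Dict (Int × Int) (Int × Int)),
      (∀ y, pvPar d y = y) →
      ∀ y, pvPar (l.foldl (fun d p => d.insert p p) d) y = y := by
    intro l
    induction l with
    | nil => intro d hd y; exact hd y
    | cons p l ih =>
      intro d hd y
      rw [List.foldl_cons]
      refine ih _ ?_ y
      intro y'
      unfold pvPar
      rw [PySem.Dict.getD_insert]
      by_cases hy : y' = p
      · rw [if_pos hy]
        exact hy.symm
      · rw [if_neg hy]
        exact hd y'
  exact hgen _ _ (fun y => by unfold pvPar; rw [PySem.Dict.getD_empty]) x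

theorem parent0_inv (g : List (List String)) : pvInv g (pvParent0 g) [] := by
  refine ⟨fun x => ?_, fun x => ?_, fun x _ y hy => ?_, fun x hne => ?_⟩
  · rw [parent0_par]
    exact cLe_refl x
  · rw [parent0_par]
    exact Relation.EqvGen.refl x
  · exact (pvR_nil.1 hy) ▸ cLe_refl x
  · exact absurd (parent0_par g x) hne

theorem foldl_union_inv (g : List (List String)) :
    ∀ (l : List ((Int × Int) × (Int × Int))) (par : PySem.Dict (Int × Int) (Int × Int))
      (E : List ((Int × Int) × (Int × Int))),
    pvInv g par E → (∀ e ∈ l, pvInb g e.1 ∧ pvInb g e.2) →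
    pvInv g (l.foldl
      (fun par e => pvUnion par (g.length * (PySem.List.pyGetD g 0 []).length) e.1 e.2) par)
      (E ++ l) := by
  intro l
  induction l with
  | nil => intro par E h _; simpa using h
  | cons e l ih =>
    intro par E h hInb
    rw [List.foldl_cons]
    have h1 := pvUnion_inv h (hInb e (List.mem_cons_self ..)).1 (hInb e (List.mem_cons_self ..)).2
    have h2 := ih _ _ h1 (fun e' he' => hInb e' (List.mem_cons_of_mem _ he'))
    have hassoc : E ++ e :: l = (E ++ [(e.1, e.2)]) ++ l := by simp
    rw [hassoc]
    exact h2

theorem parentF_inv (g : List (List String)) : pvInv g (pvParentF g) (pvEdges g) := by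
  have h := foldl_union_inv g (pvEdges g) (pvParent0 g) [] (parent0_inv g)
    (fun e he => by
      obtain ⟨h1, h2⟩ := pvEdges_inb (show (e.1, e.2) ∈ pvEdges g from he)
      exact ⟨h1, h2⟩)
  rw [parentF_foldl_edges]
  simpa using h

-- ---------- find characterisations ----------
theorem find_root_iff (g : List (List String)) {x : Int × Int}
    (hFW : pvFW g x) (hInb : pvInb g x) :
    pvFind (pvParentF g) (g.length * (PySem.List.pyGetD g 0 []).length) x = x ↔
      ∀ q, pvConn g (pvTyp g x) x q → cLe x q := by
  have hinv := parentF_inv g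
  obtain ⟨hroot, hR, hle, _⟩ := pvFind_spec hinv
    (g.length * (PySem.List.pyGetD g 0 []).length) x (pvMu_le g x)
  obtain ⟨i1, i2, i3, i5⟩ := hinv
  constructor
  · intro hfx q hq
    exact i3 x (hfx ▸ hroot) q (pvR_edges_char.2 (Or.inr ⟨hFW, hInb, hq⟩))
  · intro hmin
    rcases pvR_edges_char.1 hR with heq | ⟨_, _, hconn⟩
    · exact heq.symm
    · exact cLe_antisymm hle (hmin _ hconn)

theorem find_eq_iff_conn (g : List (List String)) {x y : Int × Int}
    (hFWx : pvFW g x) (hInbx : pvInb g x) :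
    pvFind (pvParentF g) (g.length * (PySem.List.pyGetD g 0 []).length) x =
      pvFind (pvParentF g) (g.length * (PySem.List.pyGetD g 0 []).length) y ↔
      pvConn g (pvTyp g x) x y := by
  have hinv := parentF_inv g
  obtain ⟨hrx, hRx, _, _⟩ := pvFind_spec hinv
    (g.length * (PySem.List.pyGetD g 0 []).length) x (pvMu_le g x)
  obtain ⟨hry, hRy, _, _⟩ := pvFind_spec hinv
    (g.length * (PySem.List.pyGetD g 0 []).length) y (pvMu_le g y)
  obtain ⟨i1, i2, i3, i5⟩ := hinv
  constructor
  · intro he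
    have hRxy : pvR (pvEdges g) x y := pvR_trans hRx (he ▸ pvR_symm hRy)
    rcases pvR_edges_char.1 hRxy with heq | ⟨_, _, hconn⟩
    · rw [heq]
      exact Relation.ReflTransGen.refl
    · exact hconn
  · intro hconn
    have hRxy : pvR (pvEdges g) x y := pvR_edges_char.2 (Or.inr ⟨hFWx, hInbx, hconn⟩)
    have hRr : pvR (pvEdges g)
        (pvFind (pvParentF g) (g.length * (PySem.List.pyGetD g 0 []).length) x)
        (pvFind (pvParentF g) (g.length * (PySem.List.pyGetD g 0 []).length) y) :=
      pvR_trans (pvR_symm hRx) (pvR_trans hRxy hRy)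
    exact cLe_antisymm (i3 _ hrx _ hRr) (i3 _ hry _ (pvR_symm hRr))

-- ---------- the bad set ----------
theorem foldl_badstep_mem (g : List (List String))
    (parent : PySem.Dict (Int × Int) (Int × Int)) :
    ∀ (l : List (Int × Int)) (s : PySem.Set (Int × Int)) (z : Int × Int),
      z ∈ l.foldl (pvBadStep g parent) s ↔
        z ∈ s ∨ ∃ y ∈ l, (pvFW g y ∧ pvBadCond g y) ∧
          pvFind parent (g.length * (PySem.List.pyGetD g 0 []).length) y = z := by
  intro l
  induction l with
  | nil => simp
  | cons a l ih =>
    intro s z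
    rw [List.foldl_cons]
    have hstep : pvBadStep g parent s a =
        @ite _ (pvFW g a ∧ pvBadCond g a) (Classical.propDecidable _)
          (PySem.Set.add s (pvFind parent (g.length * (PySem.List.pyGetD g 0 []).length) a))
          s := by
      simp only [pvBadStep]
      by_cases hFW : pvAt g a.1 a.2 = "Farm" ∨ pvAt g a.1 a.2 = "Water"
      · rw [if_pos hFW]
        by_cases hB : a.1 = 0 ∨ a.1 = (g.length : Int) - 1 ∨ a.2 = 0 ∨
            a.2 = ((PySem.List.pyGetD g 0 []).length : Int) - 1 ∨
            pvAt g (a.1 - 1) a.2 = (if pvAt g a.1 a.2 = "Farm" then "Water" else "Farm") ∨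
            pvAt g (a.1 + 1) a.2 = (if pvAt g a.1 a.2 = "Farm" then "Water" else "Farm") ∨
            pvAt g a.1 (a.2 - 1) = (if pvAt g a.1 a.2 = "Farm" then "Water" else "Farm") ∨
            pvAt g a.1 (a.2 + 1) = (if pvAt g a.1 a.2 = "Farm" then "Water" else "Farm")
        · rw [if_pos hB, if_pos (show pvFW g a ∧ pvBadCond g a from ⟨hFW, hB⟩)]
        · rw [if_neg hB, if_neg (show ¬(pvFW g a ∧ pvBadCond g a) from fun hc => hB hc.2)]
      · rw [if_neg hFW, if_neg (show ¬(pvFW g a ∧ pvBadCond g a) from fun hc => hFW hc.1)]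
    rw [hstep]
    by_cases hc : pvFW g a ∧ pvBadCond g a
    · rw [if_pos hc, ih]
      constructor
      · rintro (hz | ⟨y, hy, hcond, hfy⟩)
        · rcases (PySem.Set.mem_add s _ z).1 hz with h | h
          · exact Or.inl h
          · exact Or.inr ⟨a, List.mem_cons_self .., hc, h.symm⟩
        · exact Or.inr ⟨y, List.mem_cons_of_mem _ hy, hcond, hfy⟩
      · rintro (hz | ⟨y, hy, hcond, hfy⟩)
        · exact Or.inl ((PySem.Set.mem_add s _ z).2 (Or.inl hz))
        · rcases List.mem_cons.1 hy with heq | hy'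
          · refine Or.inl ((PySem.Set.mem_add s _ z).2 (Or.inr ?_))
            rw [← hfy, heq]
          · exact Or.inr ⟨y, hy', hcond, hfy⟩
    · rw [if_neg hc, ih]
      constructor
      · rintro (hz | ⟨y, hy, hcond, hfy⟩)
        · exact Or.inl hz
        · exact Or.inr ⟨y, List.mem_cons_of_mem _ hy, hcond, hfy⟩
      · rintro (hz | ⟨y, hy, hcond, hfy⟩)
        · exact Or.inl hz
        · rcases List.mem_cons.1 hy with heq | hy'
          · exact absurd (heq ▸ hcond) hc
          · exact Or.inr ⟨y, hy', hcond, hfy⟩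

theorem pvBadSet_mem (g : List (List String)) (z : Int × Int) :
    z ∈ pvBadSet g ↔ ∃ y ∈ pvCells g, (pvFW g y ∧ pvBadCond g y) ∧
      pvFind (pvParentF g) (g.length * (PySem.List.pyGetD g 0 []).length) y = z := by
  unfold pvBadSet
  rw [foldl_badstep_mem]
  simp [PySem.Set.empty]

-- a Farm/Water cell trips the border/opposite test iff its A-side goodness fails
theorem pvBadCond_iff {g : List (List String)} {x : Int × Int} (hx : pvInb g x) :
    pvBadCond g x ↔ ¬ pvGood g (pvOpp (pvTyp g x)) x := by
  obtain ⟨hx1, hx2, hx3, hx4⟩ := hx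
  unfold pvBadCond pvGood pvDirs
  simp only [List.mem_cons, List.not_mem_nil, or_false, forall_eq_or_imp, forall_eq]
  unfold pvInb
  constructor
  · intro hC hG
    obtain ⟨⟨g1a, g1b⟩, ⟨g2a, g2b⟩, ⟨g3a, g3b⟩, ⟨g4a, g4b⟩⟩ := hG
    rcases hC with h | h | h | h | h | h | h | h
    · obtain ⟨c1, _, _, _⟩ := g2a
      dsimp at c1
      omega
    · obtain ⟨_, c2, _, _⟩ := g1a
      dsimp at c2
      omega
    · obtain ⟨_, _, c3, _⟩ := g4a
      dsimp at c3
      omega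
    · obtain ⟨_, _, _, c4⟩ := g3a
      dsimp at c4
      omega
    · refine g2b ?_
      rw [show x.1 + (-1 : Int) = x.1 - 1 from by ring, show x.2 + (0 : Int) = x.2 from by ring]
      exact h
    · refine g1b ?_
      rw [show x.2 + (0 : Int) = x.2 from by ring]
      exact h
    · refine g4b ?_
      rw [show x.1 + (0 : Int) = x.1 from by ring, show x.2 + (-1 : Int) = x.2 - 1 from by ring]
      exact h
    · refine g3b ?_
      rw [show x.1 + (0 : Int) = x.1 from by ring]
      exact h
  · intro hG
    by_contra hC
    push_neg at hC
    obtain ⟨c1, c2, c3, c4, c5, c6, c7, c8⟩ := hC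
    refine hG ⟨⟨⟨?_, ?_, ?_, ?_⟩, ?_⟩, ⟨⟨?_, ?_, ?_, ?_⟩, ?_⟩,
      ⟨⟨?_, ?_, ?_, ?_⟩, ?_⟩, ⟨⟨?_, ?_, ?_, ?_⟩, ?_⟩⟩
    · dsimp; omega
    · dsimp; omega
    · dsimp; omega
    · dsimp; omega
    · intro hh
      apply c6
      rw [show x.2 + (0 : Int) = x.2 from by ring] at hh
      exact hh
    · dsimp; omega
    · dsimp; omega
    · dsimp; omega
    · dsimp; omega
    · intro hh
      apply c5
      rw [show x.1 + (-1 : Int) = x.1 - 1 from by ring, show x.2 + (0 : Int) = x.2 from by ring] at hh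
      exact hh
    · dsimp; omega
    · dsimp; omega
    · dsimp; omega
    · dsimp; omega
    · intro hh
      apply c8
      rw [show x.1 + (0 : Int) = x.1 from by ring] at hh
      exact hh
    · dsimp; omega
    · dsimp; omega
    · dsimp; omega
    · dsimp; omega
    · intro hh
      apply c7
      rw [show x.1 + (0 : Int) = x.1 from by ring, show x.2 + (-1 : Int) = x.2 - 1 from by ring] at hh
      exact hh

-- ---------- the counting loop ----------
theorem foldl_cnt (g : List (List String)) (parent : PySem.Dict (Int × Int) (Int × Int))
    (bad : PySem.Set (Int × Int)) :
    ∀ (l : List (Int × Int)) (ct : Int),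
      l.foldl (pvCntStep g parent bad) ct =
        ct + (l.countP (fun x => decide ((pvAt g x.1 x.2 = "Farm" ∨ pvAt g x.1 x.2 = "Water") ∧
          pvFind parent (g.length * (PySem.List.pyGetD g 0 []).length) x = x ∧ x ∉ bad)) : Int) := by
  intro l
  induction l with
  | nil => simp
  | cons a l ih =>
    intro ct
    rw [List.foldl_cons, List.countP_cons]
    simp only [pvCntStep]
    by_cases hc : (pvAt g a.1 a.2 = "Farm" ∨ pvAt g a.1 a.2 = "Water") ∧
        pvFind parent (g.length * (PySem.List.pyGetD g 0 []).length) a = a ∧ a ∉ bad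
    · rw [if_pos hc, ih, decide_eq_true hc, if_pos (rfl : true = true)]
      push_cast
      ring
    · rw [if_neg hc, ih, decide_eq_false hc, if_neg (Bool.false_ne_true)]
      push_cast
      ring

-- ---------- B computes the canonical count ----------
theorem shoreside_B_cell_iff (g : List (List String)) {x : Int × Int} (hInb : pvInb g x) :
    ((pvAt g x.1 x.2 = "Farm" ∨ pvAt g x.1 x.2 = "Water") ∧
      pvFind (pvParentF g) (g.length * (PySem.List.pyGetD g 0 []).length) x = x ∧
      x ∉ pvBadSet g) ↔ pvCounted g x := by
  constructor
  · rintro ⟨hFW, hroot, hnb⟩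
    refine ⟨hFW, hInb, (find_root_iff g hFW hInb).1 hroot, ?_⟩
    intro q hq
    by_contra hng
    rcases pvConn_cases hq with heq | ⟨_, hInbq, htx, htq⟩
    · refine hnb ((pvBadSet_mem g x).2 ⟨x, mem_pvCells.2 hInb, ⟨hFW, ?_⟩, hroot⟩)
      rw [← heq] at hng
      exact (pvBadCond_iff hInb).2 hng
    · have htqx : pvTyp g q = pvTyp g x := htq.trans htx.symm
      have hFWq : pvFW g q := pvFW_of_typ_eq htqx hFW
      have hfq : pvFind (pvParentF g) (g.length * (PySem.List.pyGetD g 0 []).length) q = x := by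
        have := (find_eq_iff_conn g hFW hInb (y := q)).2 hq
        rw [← this, hroot]
      refine hnb ((pvBadSet_mem g x).2 ⟨q, mem_pvCells.2 hInbq, ⟨hFWq, ?_⟩, hfq⟩)
      refine (pvBadCond_iff hInbq).2 ?_
      rw [htqx]
      exact hng
  · rintro ⟨hFW, _, hmin, hgood⟩
    refine ⟨hFW, (find_root_iff g hFW hInb).2 hmin, ?_⟩
    intro hx
    obtain ⟨y, hyc, ⟨hFWy, hBady⟩, hfy⟩ := (pvBadSet_mem g x).1 hx
    have hInby := mem_pvCells.1 hyc
    have hfx : pvFind (pvParentF g) (g.length * (PySem.List.pyGetD g 0 []).length) x = x :=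
      (find_root_iff g hFW hInb).2 hmin
    have hconn : pvConn g (pvTyp g y) y x := by
      refine (find_eq_iff_conn g hFWy hInby).1 ?_
      rw [hfy, hfx]
    rcases pvConn_cases hconn with heq | ⟨_, _, _, htx⟩
    · refine (pvBadCond_iff hInby).1 hBady ?_
      rw [heq]
      exact hgood x Relation.ReflTransGen.refl
    · have hconn' : pvConn g (pvTyp g x) x y := by
        rw [htx]
        exact pvConn_symm hconn
      refine (pvBadCond_iff hInby).1 hBady ?_
      rw [show pvOpp (pvTyp g y) = pvOpp (pvTyp g x) from by rw [← htx]]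
      exact hgood y hconn'

theorem shoreside_B_val (g : List (List String)) :
    shoreside_progress_alt g = (((pvCells g).countP (fun p => @decide (pvCounted g p) (Classical.propDecidable _)) : Nat) : Int) * 3 := by
  by_cases hg : (g.length : Int) = 0
  · have hnil : g = [] := by
      cases g with
      | nil => rfl
      | cons a l =>
        exfalso
        simp at hg
        omega
    subst hnil
    have hcells : pvCells ([] : List (List String)) = [] := by
      unfold pvCells pvH pvW
      rfl
    rw [hcells]
    simp [shoreside_progress_alt]
  · rw [alt_eq g hg, foldl_cnt]
    have hcong : (pvCells g).countP
        (fun x => decide ((pvAt g x.1 x.2 = "Farm" ∨ pvAt g x.1 x.2 = "Water") ∧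
          pvFind (pvParentF g) (g.length * (PySem.List.pyGetD g 0 []).length) x = x ∧
          x ∉ pvBadSet g)) =
        (pvCells g).countP (fun p => @decide (pvCounted g p) (Classical.propDecidable _)) := by
      apply List.countP_congr
      intro x hxc
      have hiff := shoreside_B_cell_iff g (mem_pvCells.1 hxc)
      rw [decide_eq_true_eq]
      rw [@decide_eq_true_iff _ (Classical.propDecidable _)]
      exact hiff
    rw [hcong]
    push_cast
    ring


-- ===== VERDICT (by name: the statement is the Claim_ definition above) =====
theorem shoreside_progress_spec : Claim_equal_shoreside_progress := by
  intro g _ _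
  unfold Spec_shoreside_progress
  rw [shoreside_A_val g, shoreside_B_val g]
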